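-- pv_equiv track=rewrite | github.com/y1zhou/Protenix | protenix/data/core/geometry_featurizer.py | compute_equivalence_groups_from_permutations
-- ===== SOURCE A (Python) =====
-- from collections import defaultdict
--
-- class DSU:
--     """Disjoint Set Union (Union-Find) helper.
--
--     Used by `compute_equivalence_groups_from_permutations()` to compute
--     connected components induced by permutation generators.
--     """
--
--     def __init__(self, n):
--         self.p = list(range(n))
--         self.r = [0] * n
--
--     def find(self, x):
--         """Find the representative of x with path compression."""
--         while self.p[x] != x:
--             self.p[x] = self.p[self.p[x]]
--             x = self.p[x]
--         return x
--
--     def union(self, a, b):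
--         """Union the sets containing a and b (union by rank)."""
--         ra, rb = self.find(a), self.find(b)
--         if ra == rb:
--             return
--         if self.r[ra] < self.r[rb]:
--             ra, rb = rb, ra
--         self.p[rb] = ra
--         if self.r[ra] == self.r[rb]:
--             self.r[ra] += 1
--
-- def compute_equivalence_groups_from_permutations(perms, n=None, one_based=False):
--     """
--     Compute equivalence classes induced by a set of permutations.
--
--     Args:
--         perms: A list/array of permutations. Each permutation is a length-n sequence
--             representing index mapping. Example (0-based): `[2, 0, 1, 3]` means
--             0→2, 1→0, 2→1, 3→3.
--         n: Number of indices. Defaults to `len(perms[0])`.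
--         one_based: If True, interpret permutations as 1..n and return 1-based groups.
--
--     Returns:
--         A list of sorted equivalence groups. Two indices are equivalent if one can be
--         mapped to the other by composing the provided permutations.
--     """
--     if len(perms) == 0:
--         if n is None:
--             return []
--         return [[i + 1] if one_based else [i] for i in range(n)]
--
--     if n is None:
--         n = len(perms[0])
--
--     # Normalize permutations to 0-based and validate bijectivity.
--     norm_perms = []
--     for pi in perms:
--         if len(pi) != n:
--             raise ValueError("All permutations must have the same length n.")
--         if one_based:
--             pi0 = [x - 1 for x in pi]
--             if set(pi0) != set(range(n)):
--                 raise ValueError("Each permutation must be a bijection of 1..n.")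
--             norm_perms.append(pi0)
--         else:
--             if set(pi) != set(range(n)):
--                 raise ValueError("Each permutation must be a bijection of 0..n-1.")
--             norm_perms.append(list(pi))
--
--     dsu = DSU(n)
--     # Union all edges (i, σ(i)) for each generator permutation σ.
--     for pi in norm_perms:
--         for i, j in enumerate(pi):
--             dsu.union(i, j)
--
--     buckets = defaultdict(list)
--     for i in range(n):
--         buckets[dsu.find(i)].append(i)
--
--     groups = []
--     for comp in buckets.values():
--         comp.sort()
--         if one_based:
--             comp = [x + 1 for x in comp]
--         groups.append(comp)
--     groups.sort(key=lambda g: (len(g), g))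
--     return groups
-- ===== SOURCE B (Python) =====
-- def compute_equivalence_groups_from_permutations(perms, n=None, one_based=False):
--     if len(perms) == 0:
--         if n is None:
--             return []
--         return [[i + 1] if one_based else [i] for i in range(n)]
--
--     if n is None:
--         n = len(perms[0])
--
--     # Normalize to 0-based and validate bijectivity (same errors as the original).
--     norm_perms = []
--     for pi in perms:
--         if len(pi) != n:
--             raise ValueError("All permutations must have the same length n.")
--         pi0 = [x - 1 for x in pi] if one_based else list(pi)
--         if set(pi0) != set(range(n)):
--             raise ValueError(
--                 "Each permutation must be a bijection of 1..n."
--                 if one_based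
--                 else "Each permutation must be a bijection of 0..n-1."
--             )
--         norm_perms.append(pi0)
--
--     # Undirected adjacency induced by the generators.
--     nbr = [[] for _ in range(n)]
--     for pi0 in norm_perms:
--         for i, j in enumerate(pi0):
--             nbr[i].append(j)
--             nbr[j].append(i)
--
--     # Collect each connected component by bounded-round closure.
--     assigned = [False] * n
--     groups = []
--     for s in range(n):
--         if assigned[s]:
--             continue
--         comp = {s}
--         for _ in range(n):
--             new = comp | {k for j in comp for k in nbr[j]}
--             if new == comp:
--                 break
--             comp = new
--         comp = sorted(comp)
--         for j in comp:
--             assigned[j] = True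
--         groups.append([x + 1 for x in comp] if one_based else comp)
--     groups.sort(key=lambda g: (len(g), g))
--     return groups
-- ===== Notes on version B (the rewrite author's own statement) =====
-- stated objective: alternative
-- what changed: Replaces the union-find (DSU with path compression and union by rank, root-bucketing via defaultdict) by an explicit undirected adjacency list and a bounded-round neighbourhood-closure that collects each connected component directly from its smallest unassigned node; validation, the empty-perms shortcut and the final (len, lexicographic) sort are kept.
import Mathlib
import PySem

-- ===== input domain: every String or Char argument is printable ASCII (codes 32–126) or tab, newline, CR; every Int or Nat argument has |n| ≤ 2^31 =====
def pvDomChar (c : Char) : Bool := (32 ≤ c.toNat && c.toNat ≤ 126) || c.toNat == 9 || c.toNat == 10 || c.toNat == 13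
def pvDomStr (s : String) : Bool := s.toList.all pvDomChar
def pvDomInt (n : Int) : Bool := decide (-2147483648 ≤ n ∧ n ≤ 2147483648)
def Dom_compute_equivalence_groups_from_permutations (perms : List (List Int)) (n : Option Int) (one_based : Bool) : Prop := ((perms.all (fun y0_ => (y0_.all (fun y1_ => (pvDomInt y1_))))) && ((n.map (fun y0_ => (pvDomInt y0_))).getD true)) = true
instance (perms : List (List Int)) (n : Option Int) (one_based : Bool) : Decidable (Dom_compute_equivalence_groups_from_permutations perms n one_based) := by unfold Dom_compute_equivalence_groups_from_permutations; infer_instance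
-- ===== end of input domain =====

-- B replaces the DSU (union-find) of A by an adjacency list and a bounded-round
-- neighbourhood closure per component (objective: alternative algorithm, same result).

-- ===== PORT A =====


-- find with path compression (fuel totalizes the while loop)
def pvFindA (p : List Int) (x : Int) : Nat → List Int × Int
  | 0 => (p, x)
  | Nat.succ f =>
    let px := PySem.List.pyGetD p x 0
    if px ≠ x then
      let ppx := PySem.List.pyGetD p px 0
      pvFindA (PySem.List.pySetD p x ppx) ppx f
    else (p, x)

-- union by rank
def pvUnionA (p r : List Int) (a b : Int) : List Int × List Int :=
  let s1 := pvFindA p a (p.length + 1)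
  let s2 := pvFindA s1.1 b (s1.1.length + 1)
  let p2 := s2.1
  let ra := s1.2
  let rb := s2.2
  if ra = rb then (p2, r)
  else
    let ra' := if PySem.List.pyGetD r ra 0 < PySem.List.pyGetD r rb 0 then rb else ra
    let rb' := if PySem.List.pyGetD r ra 0 < PySem.List.pyGetD r rb 0 then ra else rb
    let p3 := PySem.List.pySetD p2 rb' ra'
    let r' := if PySem.List.pyGetD r ra' 0 = PySem.List.pyGetD r rb' 0
              then PySem.List.pySetD r ra' (PySem.List.pyGetD r ra' 0 + 1) else r
    (p3, r')

-- normalization + bijectivity validation loop of A (none = ValueError)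
def pvNormA (one_based : Bool) (n0 : Int) : List (List Int) → Option (List (List Int))
  | [] => some []
  | pi :: rest =>
    if PySem.List.len pi ≠ n0 then none
    else if one_based then
      let pi0 := pi.map (fun x => x - 1)
      if PySem.Set.equal (PySem.Set.ofList pi0) (PySem.Set.ofList (PySem.List.pyRange 0 n0 1)) then
        (pvNormA one_based n0 rest).map (pi0 :: ·)
      else none
    else
      if PySem.Set.equal (PySem.Set.ofList pi) (PySem.Set.ofList (PySem.List.pyRange 0 n0 1)) then
        (pvNormA one_based n0 rest).map (pi :: ·)
      else none

def compute_equivalence_groups_from_permutations (perms : List (List Int)) (n : Option Int) (one_based : Bool) : List (List Int) :=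
  if perms.length = 0 then
    match n with
    | none => []
    | some k => (PySem.List.pyRange 0 k 1).map (fun i => if one_based then [i + 1] else [i])
  else
    let n0 : Int := match n with
      | none => PySem.List.len (perms.headD [])
      | some k => k
    match pvNormA one_based n0 perms with
    | none => []   -- Python raises ValueError here; excluded by Pre_
    | some nps =>
      let p0 := PySem.List.pyRange 0 n0 1
      let r0 := List.replicate p0.length (0 : Int)
      let st := nps.foldl
        (fun st pi => (PySem.List.enumerate pi).foldl (fun st ij => pvUnionA st.1 st.2 ij.1 ij.2) st)
        (p0, r0)
      let res := (PySem.List.pyRange 0 n0 1).foldl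
        (fun (st : List Int × PySem.Dict Int (List Int)) i =>
          let fr := pvFindA st.1 i (st.1.length + 1)
          (fr.1, st.2.modify fr.2 [] (· ++ [i])))
        (st.1, PySem.Dict.empty)
      let groups := res.2.values.map (fun comp =>
        let comp := PySem.List.sorted comp (fun x => x) false
        if one_based then comp.map (· + 1) else comp)
      PySem.List.sorted2 groups (fun g => PySem.List.len g) (fun g => g) false

-- ===== PORT B =====

-- B's normalization + validation loop (single branch, conditional offset)
def pvNormB (one_based : Bool) (n0 : Int) : List (List Int) → Option (List (List Int))
  | [] => some []
  | pi :: rest =>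
    if PySem.List.len pi ≠ n0 then none
    else
      let pi0 := if one_based then pi.map (fun x => x - 1) else pi
      if PySem.Set.equal (PySem.Set.ofList pi0) (PySem.Set.ofList (PySem.List.pyRange 0 n0 1)) then
        (pvNormB one_based n0 rest).map (pi0 :: ·)
      else none

-- undirected adjacency: nbr[i] += [j]; nbr[j] += [i]
def pvNbrB (n0 : Int) (nps : List (List Int)) : List (List Int) :=
  nps.foldl
    (fun nbr pi => (PySem.List.enumerate pi).foldl
      (fun nbr ij =>
        let i := ij.1
        let j := ij.2
        let nbr1 := PySem.List.pySetD nbr i (PySem.List.pyGetD nbr i [] ++ [j])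
        PySem.List.pySetD nbr1 j (PySem.List.pyGetD nbr1 j [] ++ [i]))
      nbr)
    (List.replicate n0.toNat ([] : List Int))

-- bounded-round neighbourhood closure with early exit
def pvCloseB (nbr : List (List Int)) : Nat → PySem.Set Int → PySem.Set Int
  | 0, comp => comp
  | Nat.succ f, comp =>
    let nw := PySem.Set.union comp (PySem.Set.ofList (comp.flatMap (fun j => PySem.List.pyGetD nbr j [])))
    if PySem.Set.equal nw comp then comp else pvCloseB nbr f nw

def compute_equivalence_groups_from_permutations_alt (perms : List (List Int)) (n : Option Int) (one_based : Bool) : List (List Int) :=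
  if perms.length = 0 then
    match n with
    | none => []
    | some k => (PySem.List.pyRange 0 k 1).map (fun i => if one_based then [i + 1] else [i])
  else
    let n0 : Int := match n with
      | none => PySem.List.len (perms.headD [])
      | some k => k
    match pvNormB one_based n0 perms with
    | none => []   -- Python raises ValueError here; excluded by Pre_
    | some nps =>
      let nbr := pvNbrB n0 nps
      let st := (PySem.List.pyRange 0 n0 1).foldl
        (fun (st : List Bool × List (List Int)) s =>
          if PySem.List.pyGetD st.1 s false then st
          else
            let comp := pvCloseB nbr n0.toNat (PySem.Set.ofList [s])
            let comps := PySem.List.sorted comp (fun x => x) false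
            let assigned := comps.foldl (fun a j => PySem.List.pySetD a j true) st.1
            (assigned, st.2 ++ [if one_based then comps.map (· + 1) else comps]))
        (List.replicate n0.toNat false, [])
      PySem.List.sorted2 st.2 (fun g => PySem.List.len g) (fun g => g) false


-- ===== PRECONDITION & SPEC =====
-- Pre_ excludes exactly the inputs on which the Python A raises ValueError
-- (a permutation of the wrong length, or one that is not a bijection of the index range).
def Pre_compute_equivalence_groups_from_permutations (perms : List (List Int)) (n : Option Int) (one_based : Bool) : Prop :=
  perms = [] ∨
  (∀ pi ∈ perms,
    PySem.List.len pi = n.getD (PySem.List.len (perms.headD [])) ∧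
    PySem.Set.equal
      (PySem.Set.ofList (if one_based then pi.map (fun x => x - 1) else pi))
      (PySem.Set.ofList (PySem.List.pyRange 0 (n.getD (PySem.List.len (perms.headD []))) 1)) = true)

instance (perms : List (List Int)) (n : Option Int) (one_based : Bool) : Decidable (Pre_compute_equivalence_groups_from_permutations perms n one_based) := by
  unfold Pre_compute_equivalence_groups_from_permutations; infer_instance

def pvWitness_compute_equivalence_groups_from_permutations : List (List Int) × Option Int × Bool :=
  ([[1, 0, 2], [0, 2, 1]], none, false)

def Spec_compute_equivalence_groups_from_permutations (perms : List (List Int)) (n : Option Int) (one_based : Bool) (out : List (List Int)) : Prop := out = compute_equivalence_groups_from_permutations_alt perms n one_based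
instance (perms : List (List Int)) (n : Option Int) (one_based : Bool) (out : List (List Int)) : Decidable (Spec_compute_equivalence_groups_from_permutations perms n one_based out) := by unfold Spec_compute_equivalence_groups_from_permutations; infer_instance

-- ===== CLAIM (what is proved, stated in full; the proofs are below) =====
def Claim_equal_compute_equivalence_groups_from_permutations : Prop := ∀ (perms : List (List Int)) (n : Option Int) (one_based : Bool), Dom_compute_equivalence_groups_from_permutations perms n one_based → Pre_compute_equivalence_groups_from_permutations perms n one_based → Spec_compute_equivalence_groups_from_permutations perms n one_based (compute_equivalence_groups_from_permutations perms n one_based)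

-- ===== LEMMAS AND PROOFS =====

-- ===== DSU core =====
def fA (p : List Int) (k : Nat) : Nat := (p.getD k 0).toNat

def rootA (N : Nat) (p : List Int) (k : Nat) : Nat := (fA p)^[N] k

def InvA (N : Nat) (p : List Int) : Prop :=
  p.length = N ∧ (∀ k, k < N → 0 ≤ p.getD k 0 ∧ fA p k < N) ∧
  (∀ k, k < N → ∃ d, (fA p)^[d+1] k = (fA p)^[d] k)

lemma getD_set_int (p : List Int) (x : Nat) (v : Int) (k : Nat) :
    (p.set x v).getD k 0 = if x = k ∧ x < p.length then v else p.getD k 0 := by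
  simp only [List.getD_eq_getElem?_getD, List.getElem?_set]
  by_cases h1 : x = k
  · subst h1
    by_cases h2 : x < p.length <;> simp [h2]
  · have : ¬ (x = k ∧ x < p.length) := fun h => h1 h.1
    rw [if_neg this, if_neg h1]

lemma iter_stable {f : Nat → Nat} {k d : Nat} (h : f^[d+1] k = f^[d] k) :
    ∀ e, d ≤ e → f^[e] k = f^[d] k := by
  intro e he
  induction e with
  | zero =>
    have : d = 0 := by omega
    rw [this]
  | succ e ih =>
    rcases Nat.lt_or_ge d (e+1) with hlt | hge
    · have hde : d ≤ e := by omega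
      calc f^[e+1] k = f (f^[e] k) := Function.iterate_succ_apply' f e k
        _ = f (f^[d] k) := by rw [ih hde]
        _ = f^[d+1] k := (Function.iterate_succ_apply' f d k).symm
        _ = f^[d] k := h
    · have : d = e + 1 := by omega
      rw [this]

lemma iter_lt_of_val {N : Nat} {f : Nat → Nat} (hval : ∀ k, k < N → f k < N)
    {k : Nat} (hk : k < N) : ∀ i, f^[i] k < N := by
  intro i
  induction i with
  | zero => simpa
  | succ i ih => rw [Function.iterate_succ_apply']; exact hval _ ih

lemma pigeon_fix {N : Nat} {f : Nat → Nat} (hval : ∀ k, k < N → f k < N)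
    {k : Nat} (hk : k < N) (hfix : ∃ d, f^[d+1] k = f^[d] k) :
    ∃ d, d + 1 ≤ N ∧ f^[d+1] k = f^[d] k := by
  classical
  set d0 := Nat.find hfix with hd0
  have hfixd0 : f^[d0+1] k = f^[d0] k := Nat.find_spec hfix
  have hiter := iter_lt_of_val hval hk
  -- the iterates 0..d0 are pairwise distinct
  have hinj : Function.Injective (fun i : Fin (d0+1) => (⟨f^[i] k, hiter i⟩ : Fin N)) := by
    intro i j hij
    simp only [Fin.mk.injEq] at hij
    by_contra hne
    -- wlog i < j
    rcases Nat.lt_or_ge (i : Nat) (j : Nat) with hlt | hge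
    case _ =>
      -- period p := j - i
      have hper : ∀ m, f^[(i : Nat) + m * ((j : Nat) - i)] k = f^[(i : Nat)] k := by
        intro m
        induction m with
        | zero => simp
        | succ m ih =>
          have : (i : Nat) + (m+1) * ((j:Nat) - i) = ((j:Nat) - i) + ((i:Nat) + m * ((j:Nat)-i)) := by ring_nf
          rw [this, Function.iterate_add_apply, ih, ← Function.iterate_add_apply]
          have : (j:Nat) - (i:Nat) + (i:Nat) = j := by omega
          rw [this, ← hij]
      have hbig : (i : Nat) + d0 * ((j:Nat) - i) ≥ d0 := by
        have : (j:Nat) - (i:Nat) ≥ 1 := by omega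
        nlinarith
      have h1 : f^[(i : Nat)] k = f^[d0] k := by
        rw [← hper d0]
        exact iter_stable hfixd0 _ hbig
      have h2 : f^[(i:Nat)+1] k = f^[(i:Nat)] k := by
        calc f^[(i:Nat)+1] k = f (f^[(i:Nat)] k) := Function.iterate_succ_apply' f _ k
          _ = f (f^[d0] k) := by rw [h1]
          _ = f^[d0+1] k := (Function.iterate_succ_apply' f d0 k).symm
          _ = f^[d0] k := hfixd0
          _ = f^[(i:Nat)] k := h1.symm
      have := Nat.find_min' hfix h2
      omega
    case _ =>
      have hlt : (j : Nat) < i := by omega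
      have hper : ∀ m, f^[(j : Nat) + m * ((i : Nat) - j)] k = f^[(j : Nat)] k := by
        intro m
        induction m with
        | zero => simp
        | succ m ih =>
          have : (j : Nat) + (m+1) * ((i:Nat) - j) = ((i:Nat) - j) + ((j:Nat) + m * ((i:Nat)-j)) := by ring_nf
          rw [this, Function.iterate_add_apply, ih, ← Function.iterate_add_apply]
          have : (i:Nat) - (j:Nat) + (j:Nat) = i := by omega
          rw [this, hij]
      have hbig : (j : Nat) + d0 * ((i:Nat) - j) ≥ d0 := by
        have : (i:Nat) - (j:Nat) ≥ 1 := by omega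
        nlinarith
      have h1 : f^[(j : Nat)] k = f^[d0] k := by
        rw [← hper d0]
        exact iter_stable hfixd0 _ hbig
      have h2 : f^[(j:Nat)+1] k = f^[(j:Nat)] k := by
        calc f^[(j:Nat)+1] k = f (f^[(j:Nat)] k) := Function.iterate_succ_apply' f _ k
          _ = f (f^[d0] k) := by rw [h1]
          _ = f^[d0+1] k := (Function.iterate_succ_apply' f d0 k).symm
          _ = f^[d0] k := hfixd0
          _ = f^[(j:Nat)] k := h1.symm
      have := Nat.find_min' hfix h2
      omega
  have hcard := Fintype.card_le_of_injective _ hinj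
  simp only [Fintype.card_fin] at hcard
  exact ⟨d0, hcard, hfixd0⟩

lemma InvA.pigeon {N : Nat} {p : List Int} (h : InvA N p) {k : Nat} (hk : k < N) :
    ∃ d, d + 1 ≤ N ∧ (fA p)^[d+1] k = (fA p)^[d] k :=
  pigeon_fix (fun k hk => (h.2.1 k hk).2) hk (h.2.2 k hk)

lemma rootA_eq_iter {N : Nat} {p : List Int} (h : InvA N p) {k : Nat} (hk : k < N)
    {e : Nat} (he : N ≤ e) : (fA p)^[e] k = rootA N p k := by
  obtain ⟨d, hdN, hfix⟩ := h.pigeon hk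
  rw [rootA, iter_stable hfix e (by omega), iter_stable hfix N (by omega)]

lemma rootA_lt {N : Nat} {p : List Int} (h : InvA N p) {k : Nat} (hk : k < N) :
    rootA N p k < N := iter_lt_of_val (fun k hk => (h.2.1 k hk).2) hk N

lemma rootA_fix {N : Nat} {p : List Int} (h : InvA N p) {k : Nat} (hk : k < N) :
    fA p (rootA N p k) = rootA N p k := by
  have h1 : (fA p)^[N+1] k = rootA N p k := rootA_eq_iter h hk (by omega)
  calc fA p (rootA N p k) = fA p ((fA p)^[N] k) := rfl
    _ = (fA p)^[N+1] k := (Function.iterate_succ_apply' _ N k).symm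
    _ = rootA N p k := h1

lemma rootA_apply {N : Nat} {p : List Int} (h : InvA N p) {k : Nat} (hk : k < N) :
    rootA N p (fA p k) = rootA N p k := by
  calc rootA N p (fA p k) = (fA p)^[N] (fA p k) := rfl
    _ = (fA p)^[N+1] k := (Function.iterate_succ_apply _ N k).symm
    _ = rootA N p k := rootA_eq_iter h hk (by omega)

lemma rootA_of_fix {N : Nat} {p : List Int} {k : Nat} (hfx : fA p k = k) :
    rootA N p k = k := Function.iterate_fixed hfx N

-- the path-halving step p[x] := p[p[x]]
lemma stepA {N : Nat} {p : List Int} (hI : InvA N p) {x : Nat} (hx : x < N) :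
    let q := p.set x (p.getD (fA p x) 0)
    (∀ k, fA q k = if k = x then fA p (fA p x) else fA p k) ∧
    InvA N q ∧ (∀ k, k < N → rootA N q k = rootA N p k) ∧
    (∀ k j, ∃ m, j ≤ m ∧ (fA q)^[j] k = (fA p)^[m] k) := by
  intro q
  have hlen : q.length = p.length := List.length_set
  have hxlen : x < p.length := by rw [hI.1]; exact hx
  have hfq : ∀ k, fA q k = if k = x then fA p (fA p x) else fA p k := by
    intro k
    simp only [fA, q, getD_set_int]
    by_cases hkx : k = x
    · subst hkx
      rw [if_pos ⟨rfl, hxlen⟩, if_pos rfl]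
    · rw [if_neg (fun h => hkx h.1.symm), if_neg hkx]
  have hchain : ∀ k j, ∃ m, j ≤ m ∧ (fA q)^[j] k = (fA p)^[m] k := by
    intro k j
    induction j with
    | zero => exact ⟨0, le_refl _, rfl⟩
    | succ j ih =>
      obtain ⟨m, hm, heq⟩ := ih
      by_cases hy : (fA q)^[j] k = x
      · refine ⟨m + 2, by omega, ?_⟩
        rw [Function.iterate_succ_apply', heq]
        rw [← heq, hy, hfq x, if_pos rfl]
        have : (fA p)^[m+2] k = fA p (fA p ((fA p)^[m] k)) := by
          rw [Function.iterate_succ_apply', Function.iterate_succ_apply']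
        rw [this, ← heq, hy]
      · refine ⟨m + 1, by omega, ?_⟩
        calc (fA q)^[j+1] k = fA q ((fA q)^[j] k) := Function.iterate_succ_apply' _ j k
          _ = fA p ((fA q)^[j] k) := by rw [hfq, if_neg hy]
          _ = fA p ((fA p)^[m] k) := by rw [heq]
          _ = (fA p)^[m+1] k := (Function.iterate_succ_apply' _ m k).symm
  have hval : ∀ k, k < N → 0 ≤ q.getD k 0 ∧ fA q k < N := by
    intro k hk
    have h1 := hI.2.1 k hk
    have hfpx : fA p x < N := (hI.2.1 x hx).2
    have h2 := hI.2.1 _ hfpx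
    constructor
    · simp only [q, getD_set_int]
      split_ifs with h
      · exact h2.1
      · exact h1.1
    · rw [hfq]
      split_ifs with h
      · exact h2.2
      · exact h1.2
  have hroot : ∀ k, k < N → (fA q)^[N] k = rootA N p k ∧ (fA q)^[N+1] k = rootA N p k := by
    intro k hk
    obtain ⟨m1, hm1, he1⟩ := hchain k N
    obtain ⟨m2, hm2, he2⟩ := hchain k (N+1)
    exact ⟨he1.trans (rootA_eq_iter hI hk (by omega)),
           he2.trans (rootA_eq_iter hI hk (by omega))⟩
  refine ⟨hfq, ⟨hlen.trans hI.1, hval, ?_⟩, ?_, hchain⟩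
  · intro k hk
    obtain ⟨h1, h2⟩ := hroot k hk
    exact ⟨N, h2.trans h1.symm⟩
  · intro k hk
    exact (hroot k hk).1

lemma findA_spec {N : Nat} : ∀ (d : Nat), ∀ (p : List Int) (k : Nat) (fuel : Nat),
    InvA N p → k < N → (fA p)^[d+1] k = (fA p)^[d] k → d < fuel →
    (pvFindA p ↑k fuel).2 = ↑(rootA N p k) ∧ InvA N (pvFindA p ↑k fuel).1 ∧
    (∀ j, j < N → rootA N (pvFindA p ↑k fuel).1 j = rootA N p j) := by
  intro d
  induction d using Nat.strong_induction_on with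
  | _ d ih =>
    intro p k fuel hI hk hfix hfuel
    obtain ⟨fu, rfl⟩ : ∃ fu, fuel = fu + 1 := ⟨fuel - 1, by omega⟩
    have hnonneg : 0 ≤ p.getD k 0 := (hI.2.1 k hk).1
    have hpx : PySem.List.pyGetD p (↑k) 0 = ↑(fA p k) := by
      simp only [PySem.List.pyGetD_natCast, fA]
      exact (Int.toNat_of_nonneg hnonneg).symm
    by_cases hfx : fA p k = k
    · -- p[x] == x: return (p, x)
      have : ¬ (PySem.List.pyGetD p (↑k) 0 ≠ (k : Int)) := by
        rw [hpx, hfx]; simp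
      have hEq : pvFindA p (↑k) (fu+1) = (p, (k:Int)) := by
        show (if PySem.List.pyGetD p (↑k) 0 ≠ (k:Int) then _ else _) = _
        rw [if_neg this]
      rw [hEq]
      exact ⟨by rw [rootA_of_fix hfx], hI, fun j hj => rfl⟩
    · -- compression step
      have hne : PySem.List.pyGetD p (↑k) 0 ≠ (k : Int) := by
        rw [hpx]
        exact_mod_cast fun h => hfx (by exact_mod_cast h)
      have hfpk : fA p k < N := (hI.2.1 k hk).2
      have hppx : PySem.List.pyGetD p (PySem.List.pyGetD p (↑k) 0) 0 = ↑(fA p (fA p k)) := by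
        rw [hpx]
        simp only [PySem.List.pyGetD_natCast, fA]
        exact (Int.toNat_of_nonneg (hI.2.1 _ hfpk).1).symm
      have hq : PySem.List.pySetD p (↑k) (PySem.List.pyGetD p (PySem.List.pyGetD p (↑k) 0) 0)
          = p.set k (p.getD (fA p k) 0) := by
        rw [PySem.List.pySetD_natCast, hpx]
        simp only [PySem.List.pyGetD_natCast, fA]
      have hstep := stepA hI hk (p := p)
      set q := p.set k (p.getD (fA p k) 0) with hqdef
      obtain ⟨hfq, hIq, hrootq, hchain⟩ := hstep
      -- d = e + 1
      obtain ⟨e, rfl⟩ : ∃ e, d = e + 1 := by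
        refine ⟨d - 1, ?_⟩
        rcases Nat.eq_zero_or_pos d with h0 | h1
        · exfalso; apply hfx; subst h0; simpa using hfix
        · omega
      -- strengthened chain from x' = f (f k)
      have hchain2 : ∀ j, ∃ m, j + 2 ≤ m ∧ (fA q)^[j] (fA p (fA p k)) = (fA p)^[m] k := by
        intro j
        induction j with
        | zero =>
          exact ⟨2, le_refl _, by simp [Function.iterate_succ_apply']⟩
        | succ j ihj =>
          obtain ⟨m, hm, heq⟩ := ihj
          by_cases hy : (fA q)^[j] (fA p (fA p k)) = k
          · refine ⟨m + 2, by omega, ?_⟩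
            calc (fA q)^[j+1] _ = fA q ((fA q)^[j] (fA p (fA p k))) := Function.iterate_succ_apply' _ _ _
              _ = fA p (fA p k) := by rw [hy, hfq, if_pos rfl]
              _ = fA p (fA p ((fA p)^[m] k)) := by rw [← heq, hy]
              _ = (fA p)^[m+2] k := by rw [Function.iterate_succ_apply', Function.iterate_succ_apply']
          · refine ⟨m + 1, by omega, ?_⟩
            calc (fA q)^[j+1] _ = fA q ((fA q)^[j] (fA p (fA p k))) := Function.iterate_succ_apply' _ _ _
              _ = fA p ((fA p)^[m] k) := by rw [hfq, if_neg hy, heq]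
              _ = (fA p)^[m+1] k := (Function.iterate_succ_apply' _ m k).symm
      -- fixedness of x' under q at e
      have hc : (fA p)^[e+1+1] k = (fA p)^[e+1] k := hfix
      have hcfix : ∀ m, e + 2 ≤ m → (fA p)^[m] k = (fA p)^[e+1] k := by
        intro m hm
        exact iter_stable hfix m (by omega)
      have hcnotk : (fA p)^[e+1] k ≠ k := by
        intro h
        apply hfx
        have h1 : fA p ((fA p)^[e+1] k) = (fA p)^[e+1] k := by
          calc fA p ((fA p)^[e+1] k) = (fA p)^[e+2] k := (Function.iterate_succ_apply' _ _ k).symm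
            _ = (fA p)^[e+1] k := hfix
        rw [h] at h1
        exact h1
      have hfixq : (fA q)^[e+1] (fA p (fA p k)) = (fA q)^[e] (fA p (fA p k)) := by
        obtain ⟨m, hm, heq⟩ := hchain2 e
        have he1 : (fA q)^[e] (fA p (fA p k)) = (fA p)^[e+1] k := by
          rw [heq, hcfix m hm]
        calc (fA q)^[e+1] _ = fA q ((fA q)^[e] (fA p (fA p k))) := Function.iterate_succ_apply' _ _ _
          _ = fA q ((fA p)^[e+1] k) := by rw [he1]
          _ = fA p ((fA p)^[e+1] k) := by rw [hfq, if_neg hcnotk]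
          _ = (fA p)^[e+2] k := (Function.iterate_succ_apply' _ _ k).symm
          _ = (fA p)^[e+1] k := hfix
          _ = (fA q)^[e] (fA p (fA p k)) := he1.symm
      have hx'lt : fA p (fA p k) < N := (hI.2.1 _ hfpk).2
      have hrec := ih e (by omega) q (fA p (fA p k)) fu hIq hx'lt hfixq (by omega)
      -- now unfold one step of pvFindA
      have hunf : pvFindA p (↑k) (fu+1) = pvFindA q ↑(fA p (fA p k)) fu := by
        show (if PySem.List.pyGetD p (↑k) 0 ≠ (k:Int) then _ else _) = _
        rw [if_pos hne, hq, hppx]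
      rw [hunf]
      refine ⟨?_, hrec.2.1, ?_⟩
      · rw [hrec.1, hrootq _ hx'lt, rootA_apply hI hfpk, rootA_apply hI hk]
      · intro j hj
        rw [hrec.2.2 j hj, hrootq j hj]

-- linking root rb beneath root ra
lemma linkA {N : Nat} {p : List Int} (hI : InvA N p) {ra rb : Nat}
    (hra : ra < N) (hrb : rb < N) (hfa : fA p ra = ra) (hfb : fA p rb = rb)
    (hne : rb ≠ ra) :
    InvA N (p.set rb ↑ra) ∧
    (∀ k, k < N → rootA N (p.set rb ↑ra) k =
      if rootA N p k = rb then ra else rootA N p k) := by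
  classical
  set q := p.set rb (↑ra : Int) with hq
  have hlen : q.length = N := by rw [hq, List.length_set, hI.1]
  have hrblen : rb < p.length := by rw [hI.1]; exact hrb
  have hfq : ∀ k, fA q k = if k = rb then ra else fA p k := by
    intro k
    simp only [fA, hq, getD_set_int]
    by_cases hk : k = rb
    · subst hk; rw [if_pos ⟨rfl, hrblen⟩, if_pos rfl, Int.toNat_natCast]
    · rw [if_neg (fun h => hk h.1.symm), if_neg hk]
  have hval : ∀ k, k < N → 0 ≤ q.getD k 0 ∧ fA q k < N := by
    intro k hk
    constructor
    · simp only [hq, getD_set_int]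
      split_ifs with h
      · positivity
      · exact (hI.2.1 k hk).1
    · rw [hfq]; split_ifs with h
      · exact hra
      · exact (hI.2.1 k hk).2
  -- if the p-chain avoids rb, the q-chain coincides
  have havoid : ∀ (k : Nat) (j : Nat), (∀ i, i < j → (fA p)^[i] k ≠ rb) →
      (fA q)^[j] k = (fA p)^[j] k := by
    intro k j
    induction j with
    | zero => intro _; rfl
    | succ j ihj =>
      intro hav
      have h1 : (fA q)^[j] k = (fA p)^[j] k := ihj (fun i hi => hav i (by omega))
      calc (fA q)^[j+1] k = fA q ((fA q)^[j] k) := Function.iterate_succ_apply' _ _ _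
        _ = fA q ((fA p)^[j] k) := by rw [h1]
        _ = fA p ((fA p)^[j] k) := by rw [hfq, if_neg (hav j (by omega))]
        _ = (fA p)^[j+1] k := (Function.iterate_succ_apply' _ _ _).symm
  have main : ∀ k, k < N →
      ((fA q)^[N] k = (if rootA N p k = rb then ra else rootA N p k)) ∧
      (∃ d, (fA q)^[d+1] k = (fA q)^[d] k) := by
    intro k hk
    obtain ⟨d0, hd0N, hfix0⟩ := hI.pigeon hk
    have hc : (fA p)^[d0] k = rootA N p k := by
      rw [rootA, iter_stable hfix0 N (by omega)]
    by_cases hcrb : rootA N p k = rb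
    · -- chain reaches rb
      have hex : ∃ i, (fA p)^[i] k = rb := ⟨d0, by rw [hc, hcrb]⟩
      set i0 := Nat.find hex with hi0
      have hi0spec : (fA p)^[i0] k = rb := Nat.find_spec hex
      have hi0min : ∀ i, i < i0 → (fA p)^[i] k ≠ rb := fun i hi => Nat.find_min hex hi
      have hi0le : i0 ≤ d0 := Nat.find_min' hex (by rw [hc, hcrb])
      have h1 : (fA q)^[i0] k = rb := by rw [havoid k i0 hi0min, hi0spec]
      have h2 : (fA q)^[i0+1] k = ra := by
        rw [Function.iterate_succ_apply', h1, hfq, if_pos rfl]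
      have h3 : (fA q)^[i0+2] k = ra := by
        rw [Function.iterate_succ_apply', h2, hfq, if_neg (fun h => hne h.symm), hfa]
      have hstab : ∀ e, i0 + 1 ≤ e → (fA q)^[e] k = ra := by
        intro e he
        have : (fA q)^[e] k = (fA q)^[i0+1] k :=
          iter_stable (k := k) (d := i0+1) (by rw [h3, h2]) e he
        rw [this, h2]
      refine ⟨?_, ⟨i0+1, by rw [h3, h2]⟩⟩
      rw [if_pos hcrb, hstab N (by omega)]
    · -- chain never meets rb
      have hav : ∀ i, (fA p)^[i] k ≠ rb := by
        intro i hirb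
        apply hcrb
        have : ∀ e, i ≤ e → (fA p)^[e] k = rb := by
          intro e he
          have hfixrb : (fA p)^[i+1] k = (fA p)^[i] k := by
            rw [Function.iterate_succ_apply', hirb, hfb]
          rw [iter_stable hfixrb e he, hirb]
        rcases Nat.le_total i N with h | h
        · rw [rootA, this N h]
        · have h1 : (fA p)^[i] k = rootA N p k := by
            rw [← hc, iter_stable hfix0 i (by omega)]
          rw [← h1, hirb]
      refine ⟨?_, ⟨d0, ?_⟩⟩
      · rw [if_neg hcrb, havoid k N (fun i _ => hav i), ← rootA]
      · rw [havoid k (d0+1) (fun i _ => hav i), havoid k d0 (fun i _ => hav i), hfix0]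
  refine ⟨⟨hlen, hval, fun k hk => (main k hk).2⟩, fun k hk => (main k hk).1⟩

-- ===== equivalence-closure machinery =====
def RE (E : List (Int × Int)) (a b : Nat) : Prop := ((a : Int), (b : Int)) ∈ E

lemma eqvgen_nil {a b : Nat} (h : Relation.EqvGen (RE []) a b) : a = b := by
  induction h with
  | rel _ _ h => exact absurd h (List.not_mem_nil)
  | refl => rfl
  | symm _ _ _ ih => exact ih.symm
  | trans _ _ _ _ _ ih1 ih2 => exact ih1.trans ih2

lemma eqvgen_snoc_aux {S : Nat → Nat → Prop} {a b : Nat} {k l : Nat}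
    (h : Relation.EqvGen (fun x y => S x y ∨ (x = a ∧ y = b)) k l) :
    Relation.EqvGen S k l ∨ (Relation.EqvGen S k a ∧ Relation.EqvGen S b l) ∨
      (Relation.EqvGen S k b ∧ Relation.EqvGen S a l) := by
  induction h with
  | rel x y h =>
    rcases h with h | ⟨rfl, rfl⟩
    · exact Or.inl (Relation.EqvGen.rel _ _ h)
    · exact Or.inr (Or.inl ⟨Relation.EqvGen.refl _, Relation.EqvGen.refl _⟩)
  | refl x => exact Or.inl (Relation.EqvGen.refl x)
  | symm x y _ ih =>
    rcases ih with h | ⟨h1, h2⟩ | ⟨h1, h2⟩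
    · exact Or.inl h.symm
    · exact Or.inr (Or.inr ⟨h2.symm, h1.symm⟩)
    · exact Or.inr (Or.inl ⟨h2.symm, h1.symm⟩)
  | trans x y z _ _ ih1 ih2 =>
    have T : ∀ {u v w : Nat}, Relation.EqvGen S u v → Relation.EqvGen S v w → Relation.EqvGen S u w :=
      fun h1 h2 => Relation.EqvGen.trans _ _ _ h1 h2
    rcases ih1 with h | ⟨h1, h2⟩ | ⟨h1, h2⟩ <;>
      rcases ih2 with g | ⟨g1, g2⟩ | ⟨g1, g2⟩
    · exact Or.inl (T h g)
    · exact Or.inr (Or.inl ⟨T h g1, g2⟩)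
    · exact Or.inr (Or.inr ⟨T h g1, g2⟩)
    · exact Or.inr (Or.inl ⟨h1, T h2 g⟩)
    · exact Or.inr (Or.inl ⟨h1, g2⟩)
    · exact Or.inl (T h1 g2)
    · exact Or.inr (Or.inr ⟨h1, T h2 g⟩)
    · exact Or.inl (T h1 g2)
    · exact Or.inr (Or.inr ⟨h1, g2⟩)

lemma eqvgen_mono_iff {S S' : Nat → Nat → Prop} (h : ∀ x y, S x y ↔ S' x y) {k l : Nat} :
    Relation.EqvGen S k l ↔ Relation.EqvGen S' k l :=
  ⟨Relation.EqvGen.mono (fun x y hs => (h x y).mp hs),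
   Relation.EqvGen.mono (fun x y hs => (h x y).mpr hs)⟩

lemma eqvgen_snoc {E : List (Int × Int)} {a b : Nat} {k l : Nat} :
    Relation.EqvGen (RE (E ++ [((a : Int), (b : Int))])) k l ↔
      (Relation.EqvGen (RE E) k l ∨
       (Relation.EqvGen (RE E) k a ∧ Relation.EqvGen (RE E) b l) ∨
       (Relation.EqvGen (RE E) k b ∧ Relation.EqvGen (RE E) a l)) := by
  have hiff : ∀ x y : Nat, RE (E ++ [((a:Int), (b:Int))]) x y ↔ (RE E x y ∨ (x = a ∧ y = b)) := by
    intro x y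
    simp only [RE, List.mem_append, List.mem_singleton, Prod.mk.injEq, Int.natCast_inj]
  constructor
  · intro h
    exact eqvgen_snoc_aux ((eqvgen_mono_iff hiff).mp h)
  · intro h
    have T : ∀ {u v w : Nat}, Relation.EqvGen (RE E) u v → Relation.EqvGen (RE E) v w → Relation.EqvGen (RE E) u w :=
      fun h1 h2 => Relation.EqvGen.trans _ _ _ h1 h2
    have hM : ∀ {u v : Nat}, Relation.EqvGen (RE E) u v → Relation.EqvGen (RE (E ++ [((a:Int),(b:Int))])) u v :=
      fun h => Relation.EqvGen.mono (fun x y hs => (List.mem_append.mpr (Or.inl hs) : RE (E ++ [((a:Int),(b:Int))]) x y)) h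
    have hab : Relation.EqvGen (RE (E ++ [((a:Int),(b:Int))])) a b :=
      Relation.EqvGen.rel _ _ (by simp [RE])
    rcases h with h | ⟨h1, h2⟩ | ⟨h1, h2⟩
    · exact hM h
    · exact Relation.EqvGen.trans _ _ _ (Relation.EqvGen.trans _ _ _ (hM h1) hab) (hM h2)
    · exact Relation.EqvGen.trans _ _ _ (Relation.EqvGen.trans _ _ _ (hM h1)
        (Relation.EqvGen.symm _ _ hab)) (hM h2)

-- ===== the union phase =====
def GOODA (N : Nat) (E : List (Int × Int)) (p : List Int) : Prop :=
  InvA N p ∧ ∀ k l, k < N → l < N →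
    (rootA N p k = rootA N p l ↔ Relation.EqvGen (RE E) k l)

lemma unionA_spec {N : Nat} {E : List (Int × Int)} {p r : List Int}
    (hG : GOODA N E p) {i j : Nat} (hi : i < N) (hj : j < N) :
    GOODA N (E ++ [((i:Int), (j:Int))]) (pvUnionA p r ↑i ↑j).1 := by
  classical
  obtain ⟨hI, hiff⟩ := hG
  obtain ⟨d1, hd1, hfix1⟩ := hI.pigeon hi
  have hf1 := findA_spec d1 p i (p.length + 1) hI hi hfix1 (by rw [hI.1]; omega)
  set s1 := pvFindA p ↑i (p.length + 1) with hs1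
  obtain ⟨hra, hI1, hroots1⟩ := hf1
  obtain ⟨d2, hd2, hfix2⟩ := hI1.pigeon hj
  have hf2 := findA_spec d2 s1.1 j (s1.1.length + 1) hI1 hj hfix2 (by rw [hI1.1]; omega)
  set s2 := pvFindA s1.1 ↑j (s1.1.length + 1) with hs2
  obtain ⟨hrb, hI2, hroots2⟩ := hf2
  have hroots12 : ∀ k, k < N → rootA N s2.1 k = rootA N p k := by
    intro k hk
    rw [hroots2 k hk, hroots1 k hk]
  set Ra := rootA N p i with hRadef
  set Rb := rootA N p j with hRbdef
  have hraval : s1.2 = ↑Ra := hra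
  have hrbval : s2.2 = ↑Rb := by rw [hrb, hroots1 j hj]
  have hRaN : Ra < N := rootA_lt hI hi
  have hRbN : Rb < N := rootA_lt hI hj
  have key : ∀ (p' : List Int), InvA N p' →
      (∀ k l, k < N → l < N →
        (rootA N p' k = rootA N p' l ↔
          (rootA N p k = rootA N p l ∨
           (rootA N p k = Ra ∧ rootA N p l = Rb) ∨
           (rootA N p k = Rb ∧ rootA N p l = Ra)))) →
      GOODA N (E ++ [((i:Int), (j:Int))]) p' := by
    intro p' hI' hch
    refine ⟨hI', fun k l hk hl => ?_⟩
    rw [hch k l hk hl, eqvgen_snoc, ← hiff k l hk hl, ← hiff k i hk hi,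
      ← hiff j l hj hl, ← hiff k j hk hj, ← hiff i l hi hl]
    rw [← hRadef, ← hRbdef]
    constructor
    · rintro (h | ⟨h1, h2⟩ | ⟨h1, h2⟩)
      · exact Or.inl h
      · exact Or.inr (Or.inl ⟨h1, h2.symm⟩)
      · exact Or.inr (Or.inr ⟨h1, h2.symm⟩)
    · rintro (h | ⟨h1, h2⟩ | ⟨h1, h2⟩)
      · exact Or.inl h
      · exact Or.inr (Or.inl ⟨h1, h2.symm⟩)
      · exact Or.inr (Or.inr ⟨h1, h2.symm⟩)
  show GOODA N _ (pvUnionA p r ↑i ↑j).1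
  simp only [pvUnionA, ← hs1, ← hs2, hraval, hrbval]
  by_cases heq : (Ra : Int) = (Rb : Int)
  · have hRaRb : Ra = Rb := by exact_mod_cast heq
    rw [if_pos heq]
    refine key s2.1 hI2 (fun k l hk hl => ?_)
    rw [hroots12 k hk, hroots12 l hl]
    omega
  · have hRaRb : Ra ≠ Rb := fun h => heq (by exact_mod_cast h)
    rw [if_neg heq]
    have hfixa : fA s2.1 Ra = Ra := by
      have := rootA_fix hI2 hi
      rwa [hroots12 i hi, ← hRadef] at this
    have hfixb : fA s2.1 Rb = Rb := by
      have := rootA_fix hI2 hj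
      rwa [hroots12 j hj, ← hRbdef] at this
    by_cases hrank : PySem.List.pyGetD r ↑Ra 0 < PySem.List.pyGetD r ↑Rb 0
    · -- ra' = Rb, rb' = Ra
      rw [if_pos hrank, if_pos hrank]
      have hset : PySem.List.pySetD s2.1 ↑Ra ↑Rb = s2.1.set Ra ↑Rb :=
        PySem.List.pySetD_natCast _ _ _
      rw [hset]
      obtain ⟨hI3, hroot3⟩ := linkA hI2 hRbN hRaN hfixb hfixa hRaRb
      refine key _ hI3 (fun k l hk hl => ?_)
      rw [hroot3 k hk, hroot3 l hl, hroots12 k hk, hroots12 l hl]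
      split_ifs <;> omega
    · -- ra' = Ra, rb' = Rb
      rw [if_neg hrank, if_neg hrank]
      have hset : PySem.List.pySetD s2.1 ↑Rb ↑Ra = s2.1.set Rb ↑Ra :=
        PySem.List.pySetD_natCast _ _ _
      rw [hset]
      obtain ⟨hI3, hroot3⟩ := linkA hI2 hRaN hRbN hfixa hfixb (fun h => hRaRb h.symm)
      refine key _ hI3 (fun k l hk hl => ?_)
      rw [hroot3 k hk, hroot3 l hl, hroots12 k hk, hroots12 l hl]
      split_ifs <;> omega

-- fold of unions over an edge list
lemma unionA_fold_edges {N : Nat} : ∀ (es : List (Int × Int)) (E : List (Int × Int))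
    (st : List Int × List Int), GOODA N E st.1 →
    (∀ e ∈ es, ∃ i j : Nat, i < N ∧ j < N ∧ e.1 = ↑i ∧ e.2 = ↑j) →
    GOODA N (E ++ es)
      (es.foldl (fun st ij => pvUnionA st.1 st.2 ij.1 ij.2) st).1 := by
  intro es
  induction es with
  | nil => intro E st hG _; simpa using hG
  | cons e rest ih =>
    intro E st hG hok
    obtain ⟨i, j, hi, hj, he1, he2⟩ := hok e (List.mem_cons_self)
    have hstep : GOODA N (E ++ [((i:Int), (j:Int))]) (pvUnionA st.1 st.2 e.1 e.2).1 := by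
      rw [he1, he2]
      exact unionA_spec hG hi hj
    have := ih (E ++ [((i:Int),(j:Int))]) (pvUnionA st.1 st.2 e.1 e.2) hstep
      (fun e' he' => hok e' (List.mem_cons_of_mem _ he'))
    rw [List.append_assoc] at this
    simp only [List.singleton_append] at this
    rw [← he1, ← he2] at this
    simpa using this

def pvEdges (nps : List (List Int)) : List (Int × Int) :=
  nps.flatMap (fun pi => PySem.List.enumerate pi)

def ValidP (N : Nat) (nps : List (List Int)) : Prop :=
  ∀ pi ∈ nps, pi.length = N ∧ ∀ v ∈ pi, 0 ≤ v ∧ v < (N : Int)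

lemma enumerate_ok {N : Nat} {pi : List Int} (hlen : pi.length = N)
    (hval : ∀ v ∈ pi, 0 ≤ v ∧ v < (N : Int)) :
    ∀ e ∈ PySem.List.enumerate pi, ∃ i j : Nat, i < N ∧ j < N ∧ e.1 = ↑i ∧ e.2 = ↑j := by
  intro e he
  rw [PySem.List.mem_enumerate_iff] at he
  obtain ⟨k, hk, rfl⟩ := he
  obtain ⟨h0, h1⟩ := hval pi[k] (pi.getElem_mem hk)
  refine ⟨k, pi[k].toNat, by omega, by omega, by simp, by simp [Int.toNat_of_nonneg h0]⟩

lemma edges_ok {N : Nat} {nps : List (List Int)} (hV : ValidP N nps) :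
    ∀ e ∈ pvEdges nps, ∃ i j : Nat, i < N ∧ j < N ∧ e.1 = ↑i ∧ e.2 = ↑j := by
  intro e he
  rw [pvEdges, List.mem_flatMap] at he
  obtain ⟨pi, hpi, he⟩ := he
  exact enumerate_ok (hV pi hpi).1 (hV pi hpi).2 e he

lemma goodA_init {N : Nat} : GOODA N [] (PySem.List.pyRange 0 (N : Int) 1) := by
  have hrange := PySem.List.pyRange_zero_natCast N
  have hf : ∀ k, k < N → fA (PySem.List.pyRange 0 (N : Int) 1) k = k := by
    intro k hk
    rw [fA, hrange, PySem.List.getD_map_range _ _ _ _ hk, Int.toNat_natCast]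
  have hroot : ∀ k, k < N → rootA N (PySem.List.pyRange 0 (N : Int) 1) k = k :=
    fun k hk => rootA_of_fix (hf k hk)
  refine ⟨⟨?_, ?_, ?_⟩, ?_⟩
  · rw [hrange, List.length_map, List.length_range]
  · intro k hk
    rw [hf k hk]
    refine ⟨?_, hk⟩
    rw [hrange, PySem.List.getD_map_range _ _ _ _ hk]
    positivity
  · intro k hk
    refine ⟨0, ?_⟩
    simp [hf k hk]
  · intro k l hk hl
    rw [hroot k hk, hroot l hl]
    constructor
    · rintro rfl; exact Relation.EqvGen.refl _
    · exact eqvgen_nil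

lemma unionA_all {N : Nat} : ∀ (nps : List (List Int)) (E : List (Int × Int))
    (st : List Int × List Int), GOODA N E st.1 → ValidP N nps →
    GOODA N (E ++ pvEdges nps)
      ((nps.foldl (fun st pi =>
        (PySem.List.enumerate pi).foldl (fun st ij => pvUnionA st.1 st.2 ij.1 ij.2) st) st)).1 := by
  intro nps
  induction nps with
  | nil => intro E st hG _; simpa [pvEdges] using hG
  | cons pi rest ih =>
    intro E st hG hV
    have hpi := hV pi (List.mem_cons_self)
    have h1 := unionA_fold_edges (PySem.List.enumerate pi) E st hG
      (enumerate_ok hpi.1 hpi.2)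
    have h2 := ih (E ++ PySem.List.enumerate pi) _ h1
      (fun q hq => hV q (List.mem_cons_of_mem _ hq))
    simp only [List.foldl_cons]
    have : pvEdges (pi :: rest) = PySem.List.enumerate pi ++ pvEdges rest := by
      simp [pvEdges]
    rw [this, ← List.append_assoc]
    exact h2

-- the bucket phase: the dict component only depends on the (stable) roots
lemma bucket_fold {N : Nat} (ρ : Nat → Nat) :
    ∀ (xs : List Int) (p : List Int) (d : PySem.Dict Int (List Int)),
    InvA N p → (∀ j, j < N → rootA N p j = ρ j) → (∀ x ∈ xs, ∃ k, k < N ∧ x = (k : Int)) →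
    (xs.foldl (fun (st : List Int × PySem.Dict Int (List Int)) i =>
        let fr := pvFindA st.1 i (st.1.length + 1)
        (fr.1, st.2.modify fr.2 [] (· ++ [i]))) (p, d)).2 =
      xs.foldl (fun d i => d.modify ((ρ i.toNat : Nat) : Int) [] (· ++ [i])) d := by
  intro xs
  induction xs with
  | nil => intro p d _ _ _; rfl
  | cons x rest ih =>
    intro p d hI hρ hxs
    obtain ⟨k, hk, rfl⟩ := hxs x (List.mem_cons_self)
    obtain ⟨d0, hd0, hfix⟩ := hI.pigeon hk
    have hf := findA_spec d0 p k (p.length + 1) hI hk hfix (by rw [hI.1]; omega)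
    obtain ⟨hr, hI', hroots⟩ := hf
    simp only [List.foldl_cons]
    rw [ih _ _ hI' (fun j hj => by rw [hroots j hj, hρ j hj])
      (fun x hx => hxs x (List.mem_cons_of_mem _ hx))]
    rw [hr, hρ k hk, Int.toNat_natCast]

-- characterize the bucket dict's values
lemma buckets_values (rangeI : List Int) (g : Int → Int) :
    (rangeI.foldl (fun (d : PySem.Dict Int (List Int)) i => d.modify (g i) [] (· ++ [i]))
        PySem.Dict.empty).values =
      (PySem.Set.ofList (rangeI.map g)).map
        (fun c => rangeI.filter (fun i => g i == c)) := by
  classical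
  set bk := rangeI.foldl (fun (d : PySem.Dict Int (List Int)) i => d.modify (g i) [] (· ++ [i]))
      PySem.Dict.empty with hbk
  have hkeys : bk.keys = PySem.Set.ofList (rangeI.map g) := by
    rw [hbk, PySem.Dict.keys_foldl_modify_key rangeI g [] (fun _ i => (· ++ [i]))]
    rw [PySem.Dict.keys_empty, PySem.Set.update_nil_left]
  have hnodup : bk.keys.Nodup := by
    rw [hkeys]; exact PySem.Set.nodup_ofList _
  have hgetD : ∀ c, bk.getD c [] = rangeI.filter (fun i => g i == c) := by
    intro c
    have hshape : bk = (rangeI.map (fun i => ((g i : Int), i))).foldl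
        (fun (d : PySem.Dict Int (List Int)) p => d.modify p.1 [] (· ++ [p.2]))
        PySem.Dict.empty := by
      rw [hbk, List.foldl_map]
    rw [hshape, PySem.Dict.getD_foldl_modify_append]
    rw [PySem.Dict.getD_empty, List.nil_append]
    rw [List.filter_map]
    rw [List.map_map]
    have : ((fun (p : Int × Int) => p.1 == c) ∘ fun i => ((g i : Int), i)) = fun i => g i == c := rfl
    rw [this]
    have : ((fun (p : Int × Int) => p.2) ∘ fun i => ((g i : Int), i)) = id := rfl
    rw [this, List.map_id]
  rw [PySem.Dict.values_eq_map_keys bk hnodup [], hkeys]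
  exact List.map_congr_left (fun c _ => hgetD c)

-- ordered dedup = first occurrences (over an initial segment of ℕ, mapped)
lemma ofList_map_range (g : Nat → Int) : ∀ (t : Nat),
    PySem.Set.ofList ((List.range t).map g) =
      ((List.range t).filter (fun s => decide (∀ j, j < s → g j ≠ g s))).map g := by
  intro t
  induction t with
  | zero => rfl
  | succ t ih =>
    rw [List.range_succ, List.map_append, List.filter_append, List.map_append]
    show PySem.Set.ofList (List.map g (List.range t) ++ [g t]) = _
    rw [PySem.Set.ofList_append_singleton, ih]
    by_cases hmem : ∃ j, j < t ∧ g j = g t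
    · -- g t already seen: add absorbs, and t is filtered out
      have hfil : (List.filter (fun s => decide (∀ j, j < s → g j ≠ g s)) [t]) = [] := by
        simp only [List.filter_cons, List.filter_nil]
        rw [if_neg]
        simp only [decide_eq_true_eq]
        intro h
        obtain ⟨j, hj, hgj⟩ := hmem
        exact h j hj hgj
      rw [hfil, List.map_nil, List.append_nil]
      apply PySem.Set.add_of_mem
      -- the first occurrence of the value g t is in the filtered list
      obtain ⟨j, hj, hgj⟩ := hmem
      classical
      have hex : ∃ j, g j = g t := ⟨j, hgj⟩
      set j0 := Nat.find hex with hj0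
      have hj0spec : g j0 = g t := Nat.find_spec hex
      have hj0le : j0 ≤ j := Nat.find_min' hex hgj
      refine List.mem_map.mpr ⟨j0, ?_, hj0spec⟩
      refine List.mem_filter.mpr ⟨List.mem_range.mpr (by omega), ?_⟩
      simp only [decide_eq_true_eq]
      intro i hi hgi
      exact absurd (Nat.find_min' hex (hgi.trans hj0spec)) (by omega)
    · -- fresh value: append, and t stays in the filter
      have hfil : (List.filter (fun s => decide (∀ j, j < s → g j ≠ g s)) [t]) = [t] := by
        simp only [List.filter_cons, List.filter_nil]
        rw [if_pos]
        simp only [decide_eq_true_eq]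
        intro j hj hgj
        exact hmem ⟨j, hj, hgj⟩
      rw [hfil]
      rw [PySem.Set.add_of_not_mem]
      · simp
      · intro hmem2
        obtain ⟨s, hs, hgs⟩ := List.mem_map.mp hmem2
        have := (List.mem_filter.mp hs).1
        exact hmem ⟨s, List.mem_range.mp this, hgs⟩

-- ===== B side =====
lemma getD_set_poly {α : Type} (p : List α) (x : Nat) (v : α) (k : Nat) (dflt : α) :
    (p.set x v).getD k dflt = if x = k ∧ x < p.length then v else p.getD k dflt := by
  simp only [List.getD_eq_getElem?_getD, List.getElem?_set]
  by_cases h1 : x = k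
  · subst h1
    by_cases h2 : x < p.length <;> simp [h2]
  · have : ¬ (x = k ∧ x < p.length) := fun h => h1 h.1
    rw [if_neg this, if_neg h1]

def NbrOK (N : Nat) (E : List (Int × Int)) (nbr : List (List Int)) : Prop :=
  nbr.length = N ∧ ∀ k, k < N → ∀ x,
    (x ∈ nbr.getD k [] ↔ (((k : Int), x) ∈ E ∨ (x, (k : Int)) ∈ E))

lemma nbr_step {N : Nat} {E : List (Int × Int)} {nbr : List (List Int)}
    (hN : NbrOK N E nbr) {i j : Nat} (hi : i < N) (hj : j < N) :
    NbrOK N (E ++ [((i : Int), (j : Int))])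
      (PySem.List.pySetD
        (PySem.List.pySetD nbr (i : Int) (PySem.List.pyGetD nbr (i : Int) [] ++ [(j : Int)]))
        (j : Int)
        (PySem.List.pyGetD
          (PySem.List.pySetD nbr (i : Int) (PySem.List.pyGetD nbr (i : Int) [] ++ [(j : Int)]))
          (j : Int) [] ++ [(i : Int)])) := by
  obtain ⟨hlen, hmem⟩ := hN
  have hgi : PySem.List.pyGetD nbr (i : Int) [] = nbr.getD i [] := by
    simp [PySem.List.pyGetD_natCast]
  set nbr1 := PySem.List.pySetD nbr (i : Int) (PySem.List.pyGetD nbr (i : Int) [] ++ [(j : Int)]) with hnbr1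
  have hnbr1' : nbr1 = nbr.set i (nbr.getD i [] ++ [(j : Int)]) := by
    rw [hnbr1, PySem.List.pySetD_natCast, hgi]
  have hlen1 : nbr1.length = N := by rw [hnbr1', List.length_set, hlen]
  have hget1 : ∀ k : Nat, nbr1.getD k [] =
      if i = k then nbr.getD i [] ++ [(j : Int)] else nbr.getD k [] := by
    intro k
    rw [hnbr1', getD_set_poly]
    by_cases h : i = k
    · subst h; rw [if_pos ⟨rfl, by rw [hlen]; exact hi⟩, if_pos rfl]
    · rw [if_neg (fun hc => h hc.1), if_neg h]
  set nbr2 := PySem.List.pySetD nbr1 (j : Int) (PySem.List.pyGetD nbr1 (j : Int) [] ++ [(i : Int)]) with hnbr2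
  have hnbr2' : nbr2 = nbr1.set j (nbr1.getD j [] ++ [(i : Int)]) := by
    rw [hnbr2, PySem.List.pySetD_natCast]
    simp [PySem.List.pyGetD_natCast]
  have hget2 : ∀ k : Nat, nbr2.getD k [] =
      if j = k then nbr1.getD j [] ++ [(i : Int)] else nbr1.getD k [] := by
    intro k
    rw [hnbr2', getD_set_poly]
    by_cases h : j = k
    · subst h; rw [if_pos ⟨rfl, by rw [hlen1]; exact hj⟩, if_pos rfl]
    · rw [if_neg (fun hc => h hc.1), if_neg h]
  have hmem2 : ∀ (k : Nat) (x : Int), x ∈ nbr2.getD k [] ↔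
      (x ∈ nbr.getD k [] ∨ (k = i ∧ x = (j : Int)) ∨ (k = j ∧ x = (i : Int))) := by
    intro k x
    rw [hget2 k]
    by_cases hjk : j = k
    · subst hjk
      rw [if_pos rfl, hget1 j]
      by_cases hij : i = j
      · subst hij
        rw [if_pos rfl]
        simp only [List.mem_append, List.mem_singleton, true_and]
        tauto
      · rw [if_neg hij]
        simp only [List.mem_append, List.mem_singleton, true_and]
        constructor
        · rintro (h | h)
          · exact Or.inl h
          · tauto
        · intro h
          rcases h with h | h | h
          · exact Or.inl h
          · exact absurd ((h.1).symm) hij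
          · tauto
    · rw [if_neg hjk, hget1 k]
      by_cases hik : i = k
      · subst hik
        rw [if_pos rfl]
        simp only [List.mem_append, List.mem_singleton, true_and]
        constructor
        · rintro (h | h)
          · exact Or.inl h
          · tauto
        · intro h
          rcases h with h | h | h
          · exact Or.inl h
          · tauto
          · exact absurd ((h.1).symm) hjk
      · rw [if_neg hik]
        constructor
        · intro h; exact Or.inl h
        · rintro (h | ⟨h1, h2⟩ | ⟨h1, h2⟩)
          · exact h
          · exact absurd h1.symm hik
          · exact absurd h1.symm hjk
  constructor
  · rw [hnbr2', List.length_set, hlen1]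
  · intro k hk x
    rw [hmem2 k x, hmem k hk x]
    simp only [List.mem_append, List.mem_singleton, Prod.mk.injEq, Int.natCast_inj]
    constructor
    · rintro ((h | h) | ⟨h1, h2⟩ | ⟨h1, h2⟩)
      · exact Or.inl (Or.inl h)
      · exact Or.inr (Or.inl h)
      · exact Or.inl (Or.inr ⟨by exact_mod_cast h1, h2⟩)
      · exact Or.inr (Or.inr ⟨h2, by exact_mod_cast h1⟩)
    · rintro ((h | ⟨h1, h2⟩) | h | ⟨h1, h2⟩)
      · exact Or.inl (Or.inl h)
      · exact Or.inr (Or.inl ⟨by exact_mod_cast h1, h2⟩)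
      · exact Or.inl (Or.inr h)
      · exact Or.inr (Or.inr ⟨by exact_mod_cast h2, h1⟩)

lemma nbr_fold_edges {N : Nat} : ∀ (es : List (Int × Int)) (E : List (Int × Int))
    (nbr : List (List Int)), NbrOK N E nbr →
    (∀ e ∈ es, ∃ i j : Nat, i < N ∧ j < N ∧ e.1 = ↑i ∧ e.2 = ↑j) →
    NbrOK N (E ++ es)
      (es.foldl (fun nbr ij =>
        let i := ij.1
        let j := ij.2
        let nbr1 := PySem.List.pySetD nbr i (PySem.List.pyGetD nbr i [] ++ [j])
        PySem.List.pySetD nbr1 j (PySem.List.pyGetD nbr1 j [] ++ [i])) nbr) := by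
  intro es
  induction es with
  | nil => intro E nbr h _; simpa using h
  | cons e rest ih =>
    intro E nbr h hok
    obtain ⟨i, j, hi, hj, he1, he2⟩ := hok e (List.mem_cons_self)
    simp only [List.foldl_cons]
    have hstep := nbr_step h hi hj
    rw [← he1, ← he2] at hstep
    have := ih (E ++ [e]) _ hstep (fun e' he' => hok e' (List.mem_cons_of_mem _ he'))
    rw [List.append_assoc] at this
    simpa using this

lemma nbr_init {N : Nat} : NbrOK N [] (List.replicate N ([] : List Int)) := by
  refine ⟨List.length_replicate, fun k hk x => ?_⟩
  rw [List.getD_eq_getElem?_getD, List.getElem?_replicate]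
  constructor
  · intro h
    split at h <;> simp_all
  · rintro (h | h) <;> exact absurd h (List.not_mem_nil)

lemma nbrB_spec {N : Nat} {nps : List (List Int)} (hV : ValidP N nps) :
    NbrOK N (pvEdges nps) (pvNbrB (N : Int) nps) := by
  rw [pvNbrB, Int.toNat_natCast]
  suffices h : ∀ (l : List (List Int)) (E : List (Int × Int)) (nbr : List (List Int)),
      NbrOK N E nbr → ValidP N l →
      NbrOK N (E ++ pvEdges l)
        (l.foldl (fun nbr pi => (PySem.List.enumerate pi).foldl
          (fun nbr ij =>
            let i := ij.1
            let j := ij.2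
            let nbr1 := PySem.List.pySetD nbr i (PySem.List.pyGetD nbr i [] ++ [j])
            PySem.List.pySetD nbr1 j (PySem.List.pyGetD nbr1 j [] ++ [i])) nbr) nbr) by
    have := h nps [] (List.replicate N []) nbr_init hV
    simpa using this
  intro l
  induction l with
  | nil => intro E nbr h _; simpa [pvEdges] using h
  | cons pi rest ih =>
    intro E nbr h hV'
    have hpi := hV' pi (List.mem_cons_self)
    have h1 := nbr_fold_edges (PySem.List.enumerate pi) E nbr h (enumerate_ok hpi.1 hpi.2)
    have h2 := ih (E ++ PySem.List.enumerate pi) _ h1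
      (fun q hq => hV' q (List.mem_cons_of_mem _ hq))
    simp only [List.foldl_cons]
    have hE : pvEdges (pi :: rest) = PySem.List.enumerate pi ++ pvEdges rest := by
      simp [pvEdges]
    rw [hE, ← List.append_assoc]
    exact h2

lemma nodup_subset_length {l m : List Int} (h : l.Nodup) (hs : l ⊆ m) :
    l.length ≤ m.length := by
  classical
  have h1 : l.toFinset ⊆ m.toFinset := by
    intro x hx; simp only [List.mem_toFinset] at *; exact hs hx
  calc l.length = l.toFinset.card := (List.toFinset_card_of_nodup h).symm
    _ ≤ m.toFinset.card := Finset.card_le_card h1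
    _ ≤ m.length := m.toFinset_card_le

lemma close_spec {N : Nat} {E : List (Int × Int)} {nbr : List (List Int)}
    (hnbr : NbrOK N E nbr)
    (hEok : ∀ e ∈ E, ∃ i j : Nat, i < N ∧ j < N ∧ e.1 = ↑i ∧ e.2 = ↑j) :
    ∀ (fuel : Nat) (comp : PySem.Set Int), comp.Nodup →
    (∀ x ∈ comp, ∃ k, k < N ∧ x = (k : Int)) →
    N + 1 ≤ fuel + comp.length →
    (pvCloseB nbr fuel comp).Nodup ∧
    (∀ x ∈ comp, x ∈ pvCloseB nbr fuel comp) ∧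
    (∀ x ∈ pvCloseB nbr fuel comp, ∃ k, k < N ∧ x = (k : Int) ∧
       ∃ s ∈ comp, Relation.EqvGen (RE E) s.toNat k) ∧
    (∀ x ∈ pvCloseB nbr fuel comp, ∀ y ∈ PySem.List.pyGetD nbr x [], y ∈ pvCloseB nbr fuel comp) := by
  -- a single expansion step is sound
  have hstep_mem : ∀ (comp : PySem.Set Int), (∀ x ∈ comp, ∃ k, k < N ∧ x = (k : Int)) →
      ∀ y ∈ PySem.Set.ofList (comp.flatMap (fun j => PySem.List.pyGetD nbr j [])),
      ∃ m, m < N ∧ y = (m : Int) ∧ ∃ s ∈ comp, Relation.EqvGen (RE E) s.toNat m := by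
    intro comp hin y hy
    rw [PySem.Set.mem_ofList, List.mem_flatMap] at hy
    obtain ⟨x, hx, hyx⟩ := hy
    obtain ⟨k, hk, rfl⟩ := hin x hx
    rw [show PySem.List.pyGetD nbr ((k : Nat) : Int) [] = nbr.getD k [] from by
      simp [PySem.List.pyGetD_natCast]] at hyx
    have hedge := (hnbr.2 k hk y).mp hyx
    rcases hedge with h | h
    · obtain ⟨i, j, hi, hj, he1, he2⟩ := hEok _ h
      simp only at he1 he2
      have hki : k = i := by exact_mod_cast he1
      refine ⟨j, hj, he2, ⟨(k : Int), hx, ?_⟩⟩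
      rw [Int.toNat_natCast, hki]
      refine Relation.EqvGen.rel _ _ ?_
      show ((i : Int), (j : Int)) ∈ E
      rw [← he1, ← he2]
      exact h
    · obtain ⟨i, j, hi, hj, he1, he2⟩ := hEok _ h
      simp only at he1 he2
      have hkj : k = j := by exact_mod_cast he2
      refine ⟨i, hi, he1, ⟨(k : Int), hx, ?_⟩⟩
      rw [Int.toNat_natCast, hkj]
      refine Relation.EqvGen.symm _ _ (Relation.EqvGen.rel _ _ ?_)
      show ((i : Int), (j : Int)) ∈ E
      rw [← he1, ← he2]
      exact h
  intro fuel
  induction fuel with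
  | zero =>
    intro comp hnd hin hlen
    exfalso
    have hsub : comp ⊆ List.map (fun k : Nat => (k : Int)) (List.range N) := by
      intro x hx
      obtain ⟨k, hk, rfl⟩ := hin x hx
      exact List.mem_map.mpr ⟨k, List.mem_range.mpr hk, rfl⟩
    have := nodup_subset_length hnd hsub
    rw [List.length_map, List.length_range] at this
    omega
  | succ f ih =>
    intro comp hnd hin hlen
    show _ ∧ _
    rw [pvCloseB]
    set nw := PySem.Set.union comp
      (PySem.Set.ofList (comp.flatMap (fun j => PySem.List.pyGetD nbr j []))) with hnw
    have hsubnw : ∀ x ∈ comp, x ∈ nw := by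
      intro x hx
      rw [hnw, PySem.Set.mem_union]
      exact Or.inl hx
    have hnwin : ∀ x ∈ nw, ∃ k, k < N ∧ x = (k : Int) := by
      intro x hx
      rw [hnw, PySem.Set.mem_union] at hx
      rcases hx with hx | hx
      · exact hin x hx
      · obtain ⟨m, hm, he, _⟩ := hstep_mem comp hin x hx
        exact ⟨m, hm, he⟩
    have hnwnd : nw.Nodup := PySem.Set.nodup_union _ _ hnd
    by_cases heq : PySem.Set.equal nw comp = true
    · rw [if_pos heq]
      have hcl : ∀ x ∈ comp, ∀ y ∈ PySem.List.pyGetD nbr x [], y ∈ comp := by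
        intro x hx y hy
        have hynw : y ∈ nw := by
          rw [hnw, PySem.Set.mem_union, PySem.Set.mem_ofList, List.mem_flatMap]
          exact Or.inr ⟨x, hx, hy⟩
        exact ((PySem.Set.equal_iff _ _).mp heq y).mp hynw
      refine ⟨hnd, fun x hx => hx, fun x hx => ?_, hcl⟩
      obtain ⟨k, hk, he⟩ := hin x hx
      exact ⟨k, hk, he, ⟨x, hx, by rw [he, Int.toNat_natCast]; exact Relation.EqvGen.refl _⟩⟩
    · rw [if_neg heq]
      have hgrow : comp.length < nw.length := by
        have hx : ∃ x, x ∈ nw ∧ x ∉ comp := by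
          by_contra hcon
          push_neg at hcon
          apply heq
          rw [PySem.Set.equal_iff]
          intro x
          exact ⟨fun h => hcon x h, fun h => hsubnw x h⟩
        obtain ⟨x, hxnw, hxc⟩ := hx
        have : (x :: comp).length ≤ nw.length :=
          nodup_subset_length (List.nodup_cons.mpr ⟨hxc, hnd⟩)
            (fun y hy => (List.mem_cons.mp hy).elim (fun h => h ▸ hxnw) (fun h => hsubnw _ h))
        simpa using Nat.lt_of_succ_le this
      have := ih nw hnwnd hnwin (by omega)
      obtain ⟨h1, h2, h3, h4⟩ := this
      refine ⟨h1, fun x hx => h2 x (hsubnw x hx), fun x hx => ?_, h4⟩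
      obtain ⟨k, hk, he, s', hs', hrel⟩ := h3 x hx
      rw [hnw, PySem.Set.mem_union] at hs'
      rcases hs' with hs' | hs'
      · exact ⟨k, hk, he, s', hs', hrel⟩
      · obtain ⟨m, hm, hsm, s'', hs'', hrel2⟩ := hstep_mem comp hin s' hs'
        refine ⟨k, hk, he, s'', hs'', ?_⟩
        have : s'.toNat = m := by rw [hsm, Int.toNat_natCast]
        rw [this] at hrel
        exact Relation.EqvGen.trans _ _ _ hrel2 hrel

lemma close_char {N : Nat} {E : List (Int × Int)} {nbr : List (List Int)}
    (hnbr : NbrOK N E nbr)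
    (hEok : ∀ e ∈ E, ∃ i j : Nat, i < N ∧ j < N ∧ e.1 = ↑i ∧ e.2 = ↑j)
    {t : Nat} (ht : t < N) :
    (pvCloseB nbr N (PySem.Set.ofList [(t : Int)])).Nodup ∧
    ∀ x, (x ∈ pvCloseB nbr N (PySem.Set.ofList [(t : Int)]) ↔
      ∃ k, k < N ∧ x = (k : Int) ∧ Relation.EqvGen (RE E) t k) := by
  have hof : PySem.Set.ofList [(t : Int)] = [(t : Int)] :=
    PySem.Set.ofList_eq_self_of_nodup _ (List.nodup_singleton _)
  have hsp := close_spec hnbr hEok N [(t : Int)] (List.nodup_singleton _)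
    (fun x hx => ⟨t, ht, by simpa using hx⟩) (by simp)
  rw [hof]
  obtain ⟨hnd, hsub, hsound, hclosed⟩ := hsp
  refine ⟨hnd, fun x => ⟨?_, ?_⟩⟩
  · intro hx
    obtain ⟨k, hk, he, s, hs, hrel⟩ := hsound x hx
    have : s = (t : Int) := by simpa using hs
    rw [this, Int.toNat_natCast] at hrel
    exact ⟨k, hk, he, hrel⟩
  · rintro ⟨k, hk, rfl, hrel⟩
    have hres : ∀ a b : Nat, Relation.EqvGen (RE E) a b →
        (((a : Int) ∈ pvCloseB nbr N [(t : Int)]) ↔ ((b : Int) ∈ pvCloseB nbr N [(t : Int)])) := by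
      intro a b h
      induction h with
      | rel a b h =>
        obtain ⟨i, j, hi, hj, he1, he2⟩ := hEok _ h
        simp only at he1 he2
        have hai : a = i := by exact_mod_cast he1
        have hbj : b = j := by exact_mod_cast he2
        have h' : (((i : Nat) : Int), ((j : Nat) : Int)) ∈ E := by
          rw [← he1, ← he2]; exact h
        have hmema : ((j : Int)) ∈ nbr.getD i [] := (hnbr.2 i hi _).mpr (Or.inl h')
        have hmemb : ((i : Int)) ∈ nbr.getD j [] := (hnbr.2 j hj _).mpr (Or.inr h')
        rw [hai, hbj]
        constructor
        · intro ha
          have := hclosed _ ha ((j : Int)) (by simpa [PySem.List.pyGetD_natCast] using hmema)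
          exact this
        · intro hb
          have := hclosed _ hb ((i : Int)) (by simpa [PySem.List.pyGetD_natCast] using hmemb)
          exact this
      | refl a => exact Iff.rfl
      | symm a b _ ih => exact ih.symm
      | trans a b c _ _ ih1 ih2 => exact ih1.trans ih2
    exact (hres t k hrel).mp (hsub _ (List.mem_singleton.mpr rfl))

lemma close_sorted {N : Nat} {E : List (Int × Int)} {nbr : List (List Int)}
    (hnbr : NbrOK N E nbr)
    (hEok : ∀ e ∈ E, ∃ i j : Nat, i < N ∧ j < N ∧ e.1 = ↑i ∧ e.2 = ↑j)
    {t : Nat} (ht : t < N) (ρ : Nat → Nat)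
    (hρ : ∀ k, k < N → (Relation.EqvGen (RE E) t k ↔ ρ t = ρ k)) :
    PySem.List.sorted (pvCloseB nbr N (PySem.Set.ofList [(t : Int)])) (fun x => x) false =
      List.map (fun k : Nat => (k : Int))
        ((List.range N).filter (fun k => decide (ρ t = ρ k))) := by
  classical
  obtain ⟨hnd, hchar⟩ := close_char hnbr hEok ht
  set ys := List.map (fun k : Nat => (k : Int))
      ((List.range N).filter (fun k => decide (ρ t = ρ k))) with hys
  have hysnd : ys.Nodup := by
    refine List.Nodup.map (fun a b h => by exact_mod_cast h) ?_
    exact (List.nodup_range).filter _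
  have hmem : ∀ x, x ∈ ys ↔ x ∈ pvCloseB nbr N (PySem.Set.ofList [(t : Int)]) := by
    intro x
    rw [hchar x, hys]
    constructor
    · intro hx
      obtain ⟨k, hk, rfl⟩ := List.mem_map.mp hx
      have := List.mem_filter.mp hk
      exact ⟨k, List.mem_range.mp this.1, rfl,
        (hρ k (List.mem_range.mp this.1)).mpr (by simpa using this.2)⟩
    · rintro ⟨k, hk, rfl, hrel⟩
      exact List.mem_map.mpr ⟨k, List.mem_filter.mpr
        ⟨List.mem_range.mpr hk, by simpa using (hρ k hk).mp hrel⟩, rfl⟩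
  have hperm : ys.Perm (pvCloseB nbr N (PySem.Set.ofList [(t : Int)])) :=
    (List.perm_ext_iff_of_nodup hysnd hnd).mpr hmem
  refine PySem.List.sorted_eq_of_perm_of_pairwise_lt _ _ _ hperm ?_
  refine List.Pairwise.map _ (fun a b h => by exact_mod_cast h) ?_
  exact (List.pairwise_lt_range).filter _


lemma set_true_fold {N : Nat} : ∀ (l : List Int) (a : List Bool),
    (∀ x ∈ l, ∃ k, k < N ∧ x = (k : Int)) → a.length = N →
    (l.foldl (fun a j => PySem.List.pySetD a j true) a).length = N ∧
    (∀ j, j < N → (l.foldl (fun a j => PySem.List.pySetD a j true) a).getD j false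
      = (a.getD j false || decide ((j : Int) ∈ l))) := by
  intro l
  induction l with
  | nil =>
    intro a _ ha
    refine ⟨ha, fun j hj => ?_⟩
    simp
  | cons x rest ih =>
    intro a hl ha
    obtain ⟨k, hk, rfl⟩ := hl _ (List.mem_cons_self)
    have hset : PySem.List.pySetD a ((k : Nat) : Int) true = a.set k true :=
      PySem.List.pySetD_natCast _ _ _
    simp only [List.foldl_cons, hset]
    have hlen' : (a.set k true).length = N := by rw [List.length_set, ha]
    obtain ⟨h1, h2⟩ := ih (a.set k true) (fun x hx => hl x (List.mem_cons_of_mem _ hx)) hlen'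
    refine ⟨h1, fun j hj => ?_⟩
    rw [h2 j hj, getD_set_poly]
    by_cases hkj : k = j
    · subst hkj
      rw [if_pos ⟨rfl, by rw [ha]; exact hk⟩]
      simp
    · rw [if_neg (fun h => hkj h.1)]
      have : ((j : Int) ∈ (k : Int) :: rest) ↔ ((j : Int) ∈ rest) := by
        constructor
        · intro h
          rcases List.mem_cons.mp h with h | h
          · exact absurd (by exact_mod_cast h.symm : k = j) hkj
          · exact h
        · exact List.mem_cons_of_mem _
      rw [decide_eq_decide.mpr this]

lemma bmain {N : Nat} {E : List (Int × Int)} {nbr : List (List Int)}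
    (hnbr : NbrOK N E nbr)
    (hEok : ∀ e ∈ E, ∃ i j : Nat, i < N ∧ j < N ∧ e.1 = ↑i ∧ e.2 = ↑j)
    (ρ : Nat → Nat)
    (hρ : ∀ k l, k < N → l < N → (ρ k = ρ l ↔ Relation.EqvGen (RE E) k l)) (ob : Bool) :
    ∀ t, t ≤ N →
    ((List.map (fun k : Nat => (k : Int)) (List.range t)).foldl
      (fun (st : List Bool × List (List Int)) s =>
        if PySem.List.pyGetD st.1 s false then st
        else
          let comp := pvCloseB nbr N (PySem.Set.ofList [s])
          let comps := PySem.List.sorted comp (fun x => x) false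
          let assigned := comps.foldl (fun a j => PySem.List.pySetD a j true) st.1
          (assigned, st.2 ++ [if ob then comps.map (· + 1) else comps]))
      (List.replicate N false, ([] : List (List Int)))).1.length = N ∧
    (∀ j, j < N →
      ((List.map (fun k : Nat => (k : Int)) (List.range t)).foldl
        (fun (st : List Bool × List (List Int)) s =>
          if PySem.List.pyGetD st.1 s false then st
          else
            let comp := pvCloseB nbr N (PySem.Set.ofList [s])
            let comps := PySem.List.sorted comp (fun x => x) false
            let assigned := comps.foldl (fun a j => PySem.List.pySetD a j true) st.1
            (assigned, st.2 ++ [if ob then comps.map (· + 1) else comps]))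
        (List.replicate N false, ([] : List (List Int)))).1.getD j false
        = decide (∃ s, s < t ∧ ρ s = ρ j)) ∧
    ((List.map (fun k : Nat => (k : Int)) (List.range t)).foldl
      (fun (st : List Bool × List (List Int)) s =>
        if PySem.List.pyGetD st.1 s false then st
        else
          let comp := pvCloseB nbr N (PySem.Set.ofList [s])
          let comps := PySem.List.sorted comp (fun x => x) false
          let assigned := comps.foldl (fun a j => PySem.List.pySetD a j true) st.1
          (assigned, st.2 ++ [if ob then comps.map (· + 1) else comps]))
      (List.replicate N false, ([] : List (List Int)))).2
      = ((List.range t).filter (fun s => decide (∀ j, j < s → ρ j ≠ ρ s))).map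
        (fun s =>
          if ob then (List.map (fun k : Nat => (k : Int))
            ((List.range N).filter (fun k => decide (ρ s = ρ k)))).map (· + 1)
          else List.map (fun k : Nat => (k : Int))
            ((List.range N).filter (fun k => decide (ρ s = ρ k)))) := by
  intro t
  induction t with
  | zero =>
    intro _
    simp only [List.range_zero, List.map_nil, List.foldl_nil, List.filter_nil]
    refine ⟨List.length_replicate, fun j hj => ?_, by simp⟩
    rw [List.getD_eq_getElem?_getD, List.getElem?_replicate]
    have : ¬ ∃ s, s < 0 ∧ ρ s = ρ j := by rintro ⟨s, hs, _⟩; omega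
    rw [decide_eq_false this]
    split <;> simp
  | succ t ih =>
    intro ht1
    have ht : t < N := by omega
    obtain ⟨ih1, ih2, ih3⟩ := ih (by omega)
    rw [List.range_succ, List.map_append, List.foldl_append]
    set stp := (List.map (fun k : Nat => (k : Int)) (List.range t)).foldl
      (fun (st : List Bool × List (List Int)) s =>
        if PySem.List.pyGetD st.1 s false then st
        else
          let comp := pvCloseB nbr N (PySem.Set.ofList [s])
          let comps := PySem.List.sorted comp (fun x => x) false
          let assigned := comps.foldl (fun a j => PySem.List.pySetD a j true) st.1
          (assigned, st.2 ++ [if ob then comps.map (· + 1) else comps]))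
      (List.replicate N false, ([] : List (List Int))) with hstp
    simp only [List.map_cons, List.map_nil, List.foldl_cons, List.foldl_nil]
    have hcond : PySem.List.pyGetD stp.1 ((t : Nat) : Int) false = decide (∃ s, s < t ∧ ρ s = ρ t) := by
      rw [show PySem.List.pyGetD stp.1 ((t : Nat) : Int) false = stp.1.getD t false from by
        simp [PySem.List.pyGetD_natCast]]
      exact ih2 t ht
    by_cases hseen : ∃ s, s < t ∧ ρ s = ρ t
    · rw [hcond, decide_eq_true hseen]
      simp only [if_pos]
      refine ⟨ih1, fun j hj => ?_, ?_⟩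
      · rw [ih2 j hj]
        apply decide_eq_decide.mpr
        constructor
        · rintro ⟨s, hs, hss⟩
          exact ⟨s, by omega, hss⟩
        · rintro ⟨s, hs, hss⟩
          rcases Nat.lt_or_ge s t with h | h
          · exact ⟨s, h, hss⟩
          · have : s = t := by omega
            subst this
            obtain ⟨s0, hs0, hss0⟩ := hseen
            exact ⟨s0, hs0, hss0.trans hss⟩
      · rw [ih3, List.filter_append]
        have : (List.filter (fun s => decide (∀ j, j < s → ρ j ≠ ρ s)) [t]) = [] := by
          simp only [List.filter_cons, List.filter_nil]
          rw [if_neg]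
          simp only [decide_eq_true_eq]
          intro hall
          obtain ⟨s0, hs0, hss0⟩ := hseen
          exact hall s0 hs0 hss0
        rw [this, List.append_nil]
    · rw [hcond, decide_eq_false hseen]
      simp only [if_neg, Bool.false_eq_true, not_false_iff]
      have hsorted := close_sorted hnbr hEok ht ρ
        (fun k hk => (hρ t k ht hk).symm)
      have hcompsval : ∀ x ∈ PySem.List.sorted (pvCloseB nbr N (PySem.Set.ofList [((t : Nat) : Int)]))
          (fun x => x) false, ∃ k, k < N ∧ x = (k : Int) := by
        intro x hx
        rw [hsorted] at hx
        obtain ⟨k, hk, rfl⟩ := List.mem_map.mp hx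
        exact ⟨k, List.mem_range.mp (List.mem_filter.mp hk).1, rfl⟩
      obtain ⟨hlen', hget'⟩ := set_true_fold _ stp.1 hcompsval ih1
      refine ⟨hlen', fun j hj => ?_, ?_⟩
      · rw [hget' j hj, ih2 j hj]
        have hjc : ((j : Int) ∈ PySem.List.sorted (pvCloseB nbr N (PySem.Set.ofList [((t : Nat) : Int)]))
            (fun x => x) false) ↔ (ρ t = ρ j) := by
          rw [hsorted]
          constructor
          · intro h
            obtain ⟨k, hk, hkj⟩ := List.mem_map.mp h
            have : k = j := by exact_mod_cast hkj
            subst this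
            simpa using (List.mem_filter.mp hk).2
          · intro h
            exact List.mem_map.mpr ⟨j, List.mem_filter.mpr
              ⟨List.mem_range.mpr hj, by simpa using h⟩, rfl⟩
        rw [decide_eq_decide.mpr hjc, ← Bool.decide_or]
        apply decide_eq_decide.mpr
        constructor
        · rintro (⟨s, hs, hss⟩ | h)
          · exact ⟨s, by omega, hss⟩
          · exact ⟨t, by omega, h⟩
        · rintro ⟨s, hs, hss⟩
          rcases Nat.lt_or_ge s t with h | h
          · exact Or.inl ⟨s, h, hss⟩
          · have : s = t := by omega
            subst this
            exact Or.inr hss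
      · show stp.2 ++ [if ob
            then (PySem.List.sorted (pvCloseB nbr N (PySem.Set.ofList [((t : Nat) : Int)]))
              (fun x => x) false).map (· + 1)
            else PySem.List.sorted (pvCloseB nbr N (PySem.Set.ofList [((t : Nat) : Int)]))
              (fun x => x) false] = _
        rw [ih3, List.filter_append]
        have hkeep : (List.filter (fun s => decide (∀ j, j < s → ρ j ≠ ρ s)) [t]) = [t] := by
          simp only [List.filter_cons, List.filter_nil]
          rw [if_pos]
          simp only [decide_eq_true_eq]
          intro j hjt hjj
          exact hseen ⟨j, hjt, hjj⟩
        rw [hkeep, List.map_append, List.map_cons, List.map_nil]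
        congr 1
        rw [hsorted]

def targetGroups (N : Nat) (ρ : Nat → Nat) (ob : Bool) : List (List Int) :=
  ((List.range N).filter (fun s => decide (∀ j, j < s → ρ j ≠ ρ s))).map
    (fun s =>
      if ob then (List.map (fun k : Nat => (k : Int))
        ((List.range N).filter (fun k => decide (ρ s = ρ k)))).map (· + 1)
      else List.map (fun k : Nat => (k : Int))
        ((List.range N).filter (fun k => decide (ρ s = ρ k))))

lemma a_groups {N : Nat} (ρ : Nat → Nat) (ob : Bool) :
    ((PySem.List.pyRange 0 (N : Int) 1).foldl
      (fun (d : PySem.Dict Int (List Int)) i =>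
        d.modify ((ρ i.toNat : Nat) : Int) [] (· ++ [i])) PySem.Dict.empty).values.map
      (fun comp =>
        let c := PySem.List.sorted comp (fun x => x) false
        if ob then c.map (· + 1) else c) = targetGroups N ρ ob := by
  classical
  rw [buckets_values (PySem.List.pyRange 0 (N : Int) 1) (fun i => ((ρ i.toNat : Nat) : Int))]
  rw [List.map_map]
  have hrange := PySem.List.pyRange_zero_natCast N
  -- the key list
  have h1 : (PySem.List.pyRange 0 (N : Int) 1).map (fun i => ((ρ i.toNat : Nat) : Int)) =
      (List.range N).map (fun k => ((ρ k : Nat) : Int)) := by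
    rw [hrange, List.map_map]
    exact List.map_congr_left (fun k _ => by simp)
  rw [h1, ofList_map_range (fun k => ((ρ k : Nat) : Int))]
  have h2 : (List.range N).filter (fun s => decide (∀ j, j < s → ((ρ j : Nat) : Int) ≠ ((ρ s : Nat) : Int)))
      = (List.range N).filter (fun s => decide (∀ j, j < s → ρ j ≠ ρ s)) := by
    apply List.filter_congr
    intro s _
    apply decide_eq_decide.mpr
    constructor
    · intro h j hj hc
      exact h j hj (by exact_mod_cast hc)
    · intro h j hj hc
      exact h j hj (by exact_mod_cast hc)
  rw [h2, List.map_map, targetGroups]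
  apply List.map_congr_left
  intro s hs
  simp only [Function.comp_apply]
  -- inner class list
  have h3 : (PySem.List.pyRange 0 (N : Int) 1).filter
      (fun i => ((ρ i.toNat : Nat) : Int) == ((ρ s : Nat) : Int)) =
      List.map (fun k : Nat => (k : Int)) ((List.range N).filter (fun k => decide (ρ s = ρ k))) := by
    rw [hrange, List.filter_map]
    congr 1
    apply List.filter_congr
    intro k _
    show (((ρ (((k : Nat) : Int)).toNat : Nat) : Int) == ((ρ s : Nat) : Int)) = decide (ρ s = ρ k)
    rw [Int.toNat_natCast]
    by_cases h : ρ s = ρ k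
    · rw [decide_eq_true h]
      simp [h]
    · rw [decide_eq_false h]
      simp only [beq_eq_false_iff_ne, ne_eq]
      intro hc
      exact h (by exact_mod_cast hc.symm)
  rw [h3]
  have h4 : PySem.List.sorted (List.map (fun k : Nat => (k : Int))
      ((List.range N).filter (fun k => decide (ρ s = ρ k)))) (fun x => x) false =
      List.map (fun k : Nat => (k : Int)) ((List.range N).filter (fun k => decide (ρ s = ρ k))) := by
    apply PySem.List.sorted_eq_self_of_pairwise
    refine (List.Pairwise.map (R := fun (a b : Nat) => a < b) _
      (fun a b (h : a < b) => (le_of_lt (by exact_mod_cast h : (a : Int) < b))) ?_)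
    exact (List.pairwise_lt_range).filter _
  rw [h4]
def normF (ob : Bool) (pi : List Int) : List Int :=
  if ob then pi.map (fun x => x - 1) else pi

lemma norm_spec (ob : Bool) (n0 : Int) : ∀ (perms : List (List Int)),
    (∀ pi ∈ perms, PySem.List.len pi = n0 ∧
      PySem.Set.equal (PySem.Set.ofList (normF ob pi))
        (PySem.Set.ofList (PySem.List.pyRange 0 n0 1)) = true) →
    pvNormA ob n0 perms = some (perms.map (normF ob)) ∧
    pvNormB ob n0 perms = some (perms.map (normF ob)) := by
  intro perms
  induction perms with
  | nil => intro _; exact ⟨rfl, rfl⟩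
  | cons pi rest ih =>
    intro h
    obtain ⟨hlen, hbij⟩ := h pi (List.mem_cons_self)
    obtain ⟨ihA, ihB⟩ := ih (fun q hq => h q (List.mem_cons_of_mem _ hq))
    constructor
    · cases ob with
      | false =>
        rw [pvNormA, if_neg (by rw [hlen]; exact fun h => h rfl)]
        rw [if_neg Bool.false_ne_true]
        rw [if_pos (by simpa [normF] using hbij), ihA]
        simp [normF]
      | true =>
        rw [pvNormA, if_neg (by rw [hlen]; exact fun h => h rfl)]
        rw [if_pos rfl]
        show (if PySem.Set.equal (PySem.Set.ofList (pi.map (fun x => x - 1)))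
            (PySem.Set.ofList (PySem.List.pyRange 0 n0 1)) = true
          then (pvNormA true n0 rest).map ((pi.map (fun x => x - 1)) :: ·) else none) = _
        rw [if_pos (by simpa [normF] using hbij), ihA]
        simp [normF]
    · rw [pvNormB, if_neg (by rw [hlen]; exact fun h => h rfl)]
      show (if PySem.Set.equal (PySem.Set.ofList (if ob then pi.map (fun x => x - 1) else pi))
          (PySem.Set.ofList (PySem.List.pyRange 0 n0 1)) = true
        then (pvNormB ob n0 rest).map ((if ob then pi.map (fun x => x - 1) else pi) :: ·) else none) = _
      have hn : (if ob then pi.map (fun x => x - 1) else pi) = normF ob pi := rfl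
      rw [hn, if_pos hbij, ihB]
      simp

lemma valid_of_pre {N : Nat} (ob : Bool) {perms : List (List Int)}
    (h : ∀ pi ∈ perms, PySem.List.len pi = (N : Int) ∧
      PySem.Set.equal (PySem.Set.ofList (normF ob pi))
        (PySem.Set.ofList (PySem.List.pyRange 0 (N : Int) 1)) = true) :
    ValidP N (perms.map (normF ob)) := by
  intro pi' hpi'
  obtain ⟨pi, hpi, rfl⟩ := List.mem_map.mp hpi'
  obtain ⟨hlen, hbij⟩ := h pi hpi
  have hlen' : pi.length = N := by
    have : (pi.length : Int) = (N : Int) := by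
      rw [← PySem.List.len_eq]; exact hlen
    exact_mod_cast this
  constructor
  · cases ob with
    | false => simpa [normF] using hlen'
    | true => simp [normF, hlen']
  · intro v hv
    have := (PySem.Set.equal_iff _ _).mp hbij v
    rw [PySem.Set.mem_ofList, PySem.Set.mem_ofList] at this
    have hvr := this.mp hv
    have := PySem.List.mem_pyRange_one.mp hvr
    omega

lemma a_main {N : Nat} {nps : List (List Int)} (hV : ValidP N nps) (ob : Bool) :
    ∃ ρ : Nat → Nat,
      (∀ k l, k < N → l < N →
        (ρ k = ρ l ↔ Relation.EqvGen (RE (pvEdges nps)) k l)) ∧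
      PySem.List.sorted2
        (((PySem.List.pyRange 0 (N : Int) 1).foldl
            (fun (st : List Int × PySem.Dict Int (List Int)) i =>
              let fr := pvFindA st.1 i (st.1.length + 1)
              (fr.1, st.2.modify fr.2 [] (· ++ [i])))
            ((nps.foldl (fun st pi =>
                (PySem.List.enumerate pi).foldl
                  (fun st ij => pvUnionA st.1 st.2 ij.1 ij.2) st)
              (PySem.List.pyRange 0 (N : Int) 1,
               List.replicate (PySem.List.pyRange 0 (N : Int) 1).length (0 : Int))).1,
             PySem.Dict.empty)).2.values.map
          (fun comp =>
            let c := PySem.List.sorted comp (fun x => x) false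
            if ob then c.map (· + 1) else c))
        (fun g => PySem.List.len g) (fun g => g) false
      = PySem.List.sorted2 (targetGroups N ρ ob)
          (fun g => PySem.List.len g) (fun g => g) false := by
  classical
  have hGOOD0 := unionA_all nps []
    (PySem.List.pyRange 0 (N : Int) 1,
     List.replicate (PySem.List.pyRange 0 (N : Int) 1).length (0 : Int))
    (by exact goodA_init) hV
  rw [List.nil_append] at hGOOD0
  set st := nps.foldl (fun st pi =>
      (PySem.List.enumerate pi).foldl
        (fun st ij => pvUnionA st.1 st.2 ij.1 ij.2) st)
    (PySem.List.pyRange 0 (N : Int) 1,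
     List.replicate (PySem.List.pyRange 0 (N : Int) 1).length (0 : Int)) with hst
  refine ⟨rootA N st.1, hGOOD0.2, ?_⟩
  have hrange := PySem.List.pyRange_zero_natCast N
  have hbf := bucket_fold (N := N) (rootA N st.1) (PySem.List.pyRange 0 (N : Int) 1)
    st.1 PySem.Dict.empty hGOOD0.1 (fun j _ => rfl)
    (by
      intro x hx
      rw [hrange] at hx
      obtain ⟨k, hk, rfl⟩ := List.mem_map.mp hx
      exact ⟨k, List.mem_range.mp hk, rfl⟩)
  rw [hbf, a_groups (rootA N st.1) ob]

lemma b_main {N : Nat} {nps : List (List Int)} (hV : ValidP N nps) (ob : Bool)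
    (ρ : Nat → Nat)
    (hρ : ∀ k l, k < N → l < N →
      (ρ k = ρ l ↔ Relation.EqvGen (RE (pvEdges nps)) k l)) :
    PySem.List.sorted2
      (((PySem.List.pyRange 0 (N : Int) 1).foldl
          (fun (st : List Bool × List (List Int)) s =>
            if PySem.List.pyGetD st.1 s false then st
            else
              let comp := pvCloseB (pvNbrB (N : Int) nps) ((N : Int)).toNat (PySem.Set.ofList [s])
              let comps := PySem.List.sorted comp (fun x => x) false
              let assigned := comps.foldl (fun a j => PySem.List.pySetD a j true) st.1
              (assigned, st.2 ++ [if ob then comps.map (· + 1) else comps]))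
          (List.replicate ((N : Int)).toNat false, ([] : List (List Int)))).2)
      (fun g => PySem.List.len g) (fun g => g) false
    = PySem.List.sorted2 (targetGroups N ρ ob)
        (fun g => PySem.List.len g) (fun g => g) false := by
  classical
  have hnbr := nbrB_spec hV
  have hEok := edges_ok hV
  have hb := (bmain hnbr hEok ρ hρ ob N (le_refl N)).2.2
  rw [PySem.List.pyRange_zero_natCast N, Int.toNat_natCast]
  rw [hb]
  rfl

lemma else_glue (ob : Bool) (q : List Int) (rest : List (List Int)) (n0 : Int)
    (hforall : ∀ pi ∈ q :: rest, PySem.List.len pi = n0 ∧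
      PySem.Set.equal (PySem.Set.ofList (normF ob pi))
        (PySem.Set.ofList (PySem.List.pyRange 0 n0 1)) = true) :
    (match pvNormA ob n0 (q :: rest) with
     | none => ([] : List (List Int))
     | some nps =>
        PySem.List.sorted2
          (((PySem.List.pyRange 0 n0 1).foldl
              (fun (st : List Int × PySem.Dict Int (List Int)) i =>
                let fr := pvFindA st.1 i (st.1.length + 1)
                (fr.1, st.2.modify fr.2 [] (· ++ [i])))
              ((nps.foldl (fun st pi =>
                  (PySem.List.enumerate pi).foldl
                    (fun st ij => pvUnionA st.1 st.2 ij.1 ij.2) st)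
                (PySem.List.pyRange 0 n0 1,
                 List.replicate (PySem.List.pyRange 0 n0 1).length (0 : Int))).1,
               PySem.Dict.empty)).2.values.map
            (fun comp =>
              let c := PySem.List.sorted comp (fun x => x) false
              if ob then c.map (· + 1) else c))
          (fun g => PySem.List.len g) (fun g => g) false)
    = (match pvNormB ob n0 (q :: rest) with
       | none => ([] : List (List Int))
       | some nps =>
          PySem.List.sorted2
            (((PySem.List.pyRange 0 n0 1).foldl
                (fun (st : List Bool × List (List Int)) s =>
                  if PySem.List.pyGetD st.1 s false then st
                  else
                    let comp := pvCloseB (pvNbrB n0 nps) n0.toNat (PySem.Set.ofList [s])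
                    let comps := PySem.List.sorted comp (fun x => x) false
                    let assigned := comps.foldl (fun a j => PySem.List.pySetD a j true) st.1
                    (assigned, st.2 ++ [if ob then comps.map (· + 1) else comps]))
                (List.replicate n0.toNat false, ([] : List (List Int)))).2)
            (fun g => PySem.List.len g) (fun g => g) false) := by
  classical
  have hq := hforall q (List.mem_cons_self)
  obtain ⟨N, hn0⟩ : ∃ N : Nat, n0 = (N : Int) := by
    refine ⟨n0.toNat, ?_⟩
    have : (q.length : Int) = n0 := by rw [← PySem.List.len_eq]; exact hq.1
    omega
  subst hn0
  have hnorm := norm_spec ob (N : Int) (q :: rest) hforall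
  have hV := valid_of_pre ob hforall
  obtain ⟨ρ, hρ, hA⟩ := a_main hV ob
  have hB := b_main hV ob ρ hρ
  rw [hnorm.1, hnorm.2]
  exact hA.trans hB.symm

theorem ports_agree : ∀ (perms : List (List Int)) (n : Option Int) (ob : Bool),
    Pre_compute_equivalence_groups_from_permutations perms n ob →
    compute_equivalence_groups_from_permutations perms n ob =
    compute_equivalence_groups_from_permutations_alt perms n ob := by
  intro perms n ob hpre
  cases perms with
  | nil => cases n <;> rfl
  | cons q rest =>
    rcases hpre with h0 | hforall
    · exact absurd h0 (by simp)
    have hlen0 : ¬ ((q :: rest).length = 0) := by simp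
    cases n with
    | none =>
      rw [compute_equivalence_groups_from_permutations.eq_def,
        compute_equivalence_groups_from_permutations_alt.eq_def]
      rw [if_neg hlen0, if_neg hlen0]
      refine else_glue ob q rest (PySem.List.len q) ?_
      intro pi hpi
      simpa [normF] using hforall pi hpi
    | some k =>
      rw [compute_equivalence_groups_from_permutations.eq_def,
        compute_equivalence_groups_from_permutations_alt.eq_def]
      rw [if_neg hlen0, if_neg hlen0]
      refine else_glue ob q rest k ?_
      intro pi hpi
      simpa [normF] using hforall pi hpi

-- ===== VERDICT (by name: the statement is the Claim_ definition above) =====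
theorem compute_equivalence_groups_from_permutations_spec : Claim_equal_compute_equivalence_groups_from_permutations := by
  intro perms n one_based _ hpre
  unfold Spec_compute_equivalence_groups_from_permutations
  exact ports_agree perms n one_based hpre
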